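-- pv_equiv track=rewrite | github.com/ey-jo/Block-Blast-Hack | src/gaps.py | count_gaps
-- ===== SOURCE A (Python) =====
-- def count_gaps(matrix):
--     def dfs(matrix, visited, i, j):
--         # Depth-first search to count the size of a sector
--         stack = [(i, j)]
--         count = 0
--         while stack:
--             x, y = stack.pop()
--             # Check if the current position is out of bounds or already visited or not a gap
--             if x < 0 or x >= len(matrix) or y < 0 or y >= len(matrix[0]) or visited[x][y] or matrix[x][y] != 0:
--                 continue
--             # Mark the current position as visited
--             visited[x][y] = True
--             count += 1
--             # Add all 4 possible directions (up, down, left, right) to the stack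
--             stack.append((x-1, y))
--             stack.append((x+1, y))
--             stack.append((x, y-1))
--             stack.append((x, y+1))
--         return count
--
--     # Initialize the visited matrix with False values
--     visited = [[False for _ in range(len(matrix[0]))] for _ in range(len(matrix))]
--     sectors = []
--
--     # Iterate through each cell in the matrix
--     for i in range(len(matrix)):
--         for j in range(len(matrix[0])):
--             # If the cell is a gap (0) and not visited, perform DFS to find the sector size
--             if matrix[i][j] == 0 and not visited[i][j]:
--                 sector_size = dfs(matrix, visited, i, j)
--                 if sector_size > 0:
--                     sectors.append(sector_size)
--
--     return sectors
-- ===== SOURCE B (Python) =====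
-- def count_gaps(matrix):
--     # Two-pass connected-component labelling (no flood fill): scan row-major,
--     # give each zero cell the class label of its up/left zero neighbours,
--     # merging two classes (small-to-large relabelling) when both neighbours
--     # carry different labels; then one counting pass over the final labels.
--     if not matrix:
--         return []
--     rows, cols = len(matrix), len(matrix[0])
--     label = {}    # cell -> class label (a cell)
--     members = {}  # class label -> list of cells currently carrying it
--     for i in range(rows):
--         for j in range(cols):
--             if matrix[i][j] != 0:
--                 continue
--             up = label.get((i - 1, j))
--             left = label.get((i, j - 1))
--             if up is None and left is None:
--                 label[(i, j)] = (i, j)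
--                 members[(i, j)] = [(i, j)]
--             elif up is None or left is None or up == left:
--                 keep = up if up is not None else left
--                 label[(i, j)] = keep
--                 members[keep].append((i, j))
--             else:
--                 keep, victim = up, left
--                 if len(members[keep]) < len(members[victim]):
--                     keep, victim = victim, keep
--                 for cell in members[victim]:
--                     label[cell] = keep
--                 members[keep].extend(members[victim])
--                 del members[victim]
--                 label[(i, j)] = keep
--                 members[keep].append((i, j))
--     counts = {}
--     order = []
--     for i in range(rows):
--         for j in range(cols):
--             lab = label.get((i, j))
--             if lab is None:
--                 continue
--             if lab not in counts:
--                 counts[lab] = 0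
--                 order.append(lab)
--             counts[lab] += 1
--     return [counts[lab] for lab in order]
-- ===== Notes on version B (the rewrite author's own statement) =====
-- stated objective: alternative
-- what changed: A flood-fills each zero region with an explicit DFS stack over a boolean visited matrix; B never searches: it does classic two-pass connected-component labelling, propagating class labels from the up/left neighbours in one row-major sweep, merging two classes by small-to-large relabelling when a cell joins them, then counting labels in a second sweep.
import Mathlib
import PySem

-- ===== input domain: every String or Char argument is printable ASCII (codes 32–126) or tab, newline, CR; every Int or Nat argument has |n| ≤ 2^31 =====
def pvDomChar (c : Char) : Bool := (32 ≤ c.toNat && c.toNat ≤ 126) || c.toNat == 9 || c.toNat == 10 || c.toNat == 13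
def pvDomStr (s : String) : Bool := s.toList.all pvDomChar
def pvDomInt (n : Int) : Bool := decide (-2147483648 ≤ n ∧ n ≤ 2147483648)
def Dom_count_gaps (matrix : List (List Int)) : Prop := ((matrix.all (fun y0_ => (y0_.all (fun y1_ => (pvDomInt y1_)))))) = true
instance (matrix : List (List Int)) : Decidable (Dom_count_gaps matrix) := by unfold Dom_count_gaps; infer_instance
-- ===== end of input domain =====

-- B replaces A's stack-based DFS flood fill by two-pass connected-component labelling:
-- one row-major sweep that propagates class labels from the up/left neighbours (merging two
-- classes by small-to-large relabelling), then one counting sweep; same return value on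
-- every input A accepts.

abbrev Cell : Type := Int × Int

-- shared grid-indexing helpers (matrix[x][y] / visited[x][y], total with defaults; the defaults are
-- never reached on inputs satisfying Pre_, where every access is bounds-checked first)
def mcell (m : List (List Int)) (x y : Int) : Int :=
  PySem.List.pyGetD (PySem.List.pyGetD m x []) y 1

def vget (v : List (List Bool)) (x y : Int) : Bool :=
  PySem.List.pyGetD (PySem.List.pyGetD v x []) y false

def vset (v : List (List Bool)) (x y : Int) : List (List Bool) :=
  v.modify x.toNat (fun row => row.set y.toNat true)

-- the in-bounds cells in row-major order (used by the termination measure of A's search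
-- and throughout the proofs)
def gridCells (m : List (List Int)) : List Cell :=
  (List.range m.length).flatMap (fun (i : Nat) =>
    (List.range (m.headD []).length).map (fun (j : Nat) => ((i : Int), (j : Int))))

def unvisA (m : List (List Int)) (v : List (List Bool)) : Nat :=
  (gridCells m).countP (fun c => !vget v c.1 c.2)

-- one flipped element drops a countP by one
lemma countP_flip {α : Type} {p q : α → Bool} {l : List α} {c : α} (hnd : l.Nodup) (hc : c ∈ l)
    (hq : q c = false) (hp : p c = true) (hpq : ∀ d ∈ l, d ≠ c → q d = p d) :
    l.countP q + 1 = l.countP p := by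
  induction l with
  | nil => cases hc
  | cons a t ih =>
    rcases List.nodup_cons.1 hnd with ⟨hat, hnt⟩
    by_cases hca : a = c
    · subst hca
      have hqp : t.countP q = t.countP p :=
        List.countP_congr (fun d hd => by
          rw [hpq d (List.mem_cons_of_mem _ hd) (fun h => hat (h ▸ hd))])
      simp [hq, hp, hqp]
    · have hct : c ∈ t := by
        rcases List.mem_cons.1 hc with h | h
        · exact absurd h.symm hca
        · exact h
      have := ih hnt hct (fun d hd hdc => hpq d (List.mem_cons_of_mem _ hd) hdc)
      simp only [List.countP_cons, hpq a List.mem_cons_self hca]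
      omega

lemma mem_gridCells {m : List (List Int)} {c : Cell} :
    c ∈ gridCells m ↔ 0 ≤ c.1 ∧ c.1 < (m.length : Int) ∧ 0 ≤ c.2 ∧ c.2 < ((m.headD []).length : Int) := by
  obtain ⟨a, b⟩ := c
  constructor
  · intro hmem
    obtain ⟨i, hi, hmem2⟩ := List.mem_flatMap.1 hmem
    obtain ⟨j, hj, hEq⟩ := List.mem_map.1 hmem2
    rw [List.mem_range] at hi hj
    obtain ⟨e1, e2⟩ := Prod.mk.injEq .. ▸ hEq
    subst e1; subst e2
    refine ⟨by omega, by omega, by omega, by omega⟩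
  · rintro ⟨h1, h2, h3, h4⟩
    refine List.mem_flatMap.2 ⟨a.toNat, List.mem_range.2 (by omega), ?_⟩
    refine List.mem_map.2 ⟨b.toNat, List.mem_range.2 (by omega), ?_⟩
    simp only [Prod.mk.injEq]
    omega

lemma nodup_gridCells {m : List (List Int)} : (gridCells m).Nodup := by
  rw [gridCells, List.nodup_flatMap]
  constructor
  · intro i _
    refine (List.nodup_range).map ?_
    intro x y h
    have h2 : (x : Int) = (y : Int) := congrArg Prod.snd h
    exact_mod_cast h2
  · refine (List.pairwise_lt_range).imp ?_
    intro i j hij x hx hy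
    obtain ⟨a, _, rfl⟩ := List.mem_map.1 hx
    obtain ⟨b, _, h⟩ := List.mem_map.1 hy
    have h1 : (j : Int) = (i : Int) := (Prod.ext_iff.mp h).1
    omega

-- characterisation of vget after vset (nonneg indices, set in range)
lemma vget_toNat (v : List (List Bool)) {a b : Int} (ha : 0 ≤ a) (hb : 0 ≤ b) :
    vget v a b = (v.getD a.toNat []).getD b.toNat false := by
  unfold vget
  rw [PySem.List.pyGetD_of_nonneg _ _ ha, PySem.List.pyGetD_of_nonneg _ _ hb]

lemma getDD_modify_set (v : List (List Bool)) (xi yi ai bi : Nat)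
    (hr : xi < v.length) (hc : yi < (v.getD xi []).length) :
    ((v.modify xi (fun row => row.set yi true)).getD ai []).getD bi false
      = if ai = xi ∧ bi = yi then true else (v.getD ai []).getD bi false := by
  simp only [List.getD_eq_getElem?_getD] at hc ⊢
  rw [List.getElem?_modify]
  by_cases hax : ai = xi
  · subst hax
    rcases h : v[ai]? with _ | row
    · rw [List.getElem?_eq_none_iff] at h; omega
    · rw [h] at hc
      simp only [Option.getD_some] at hc
      simp only [Option.map_eq_map, Option.map_some, Option.getD_some, true_and, if_true]
      rw [List.getElem?_set]
      by_cases hby : bi = yi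
      · subst hby
        simp [hc]
      · have hyb : yi ≠ bi := fun h' => hby h'.symm
        simp [hyb, hby]
  · have hne : xi ≠ ai := fun h' => hax h'.symm
    have hnc : ¬(ai = xi ∧ bi = yi) := fun h' => hax h'.1
    rcases h : v[ai]? with _ | row <;> simp [hne, hnc]

lemma vget_vset {v : List (List Bool)} {x y : Int} (hx : 0 ≤ x) (hy : 0 ≤ y)
    (hr : x.toNat < v.length) (hc : y.toNat < (v.getD x.toNat []).length)
    {a b : Int} (ha : 0 ≤ a) (hb : 0 ≤ b) :
    vget (vset v x y) a b = if a = x ∧ b = y then true else vget v a b := by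
  rw [vget_toNat (vset v x y) ha hb, vget_toNat v ha hb]
  unfold vset
  rw [getDD_modify_set v x.toNat y.toNat a.toNat b.toNat hr hc]
  have hiff : (a.toNat = x.toNat ∧ b.toNat = y.toNat) ↔ (a = x ∧ b = y) := by omega
  rw [if_congr hiff rfl rfl]

-- the set step of A's search flips exactly one in-bounds unvisited cell
lemma unvisA_vset {m : List (List Int)} {v : List (List Bool)} {x y : Int}
    (hx : 0 ≤ x) (hxm : x < (m.length : Int)) (hy : 0 ≤ y) (hym : y < ((m.headD []).length : Int))
    (hr : x.toNat < v.length) (hc : y.toNat < (v.getD x.toNat []).length)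
    (hun : vget v x y = false) : unvisA m (vset v x y) + 1 = unvisA m v := by
  unfold unvisA
  refine countP_flip nodup_gridCells (c := (x, y)) (mem_gridCells.2 ⟨hx, hxm, hy, hym⟩) ?_ ?_ ?_
  · simp [vget_vset hx hy hr hc hx hy]
  · simp [hun]
  · intro d hd hdne
    rcases mem_gridCells.1 hd with ⟨h1, h2, h3, h4⟩
    rw [vget_vset hx hy hr hc h1 h3]
    have : ¬(d.1 = x ∧ d.2 = y) := by
      rintro ⟨e1, e2⟩; exact hdne (Prod.ext e1 e2)
    simp [this]

-- ===== PORT A =====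
-- A's inner dfs: explicit stack popped from the top, cells re-checked and marked at pop time
def dfsA (m : List (List Int)) (v : List (List Bool)) (stack : List Cell) (count : Int) :
    List (List Bool) × Int :=
  match stack with
  | [] => (v, count)
  | (x, y) :: rest =>
    if hbad : x < 0 ∨ (m.length : Int) ≤ x ∨ y < 0 ∨ ((m.headD []).length : Int) ≤ y ∨
        vget v x y = true ∨ mcell m x y ≠ 0 then
      dfsA m v rest count
    else
      if hr : x.toNat < v.length ∧ y.toNat < (v.getD x.toNat []).length then
        dfsA m (vset v x y) ((x, y + 1) :: (x, y - 1) :: (x + 1, y) :: (x - 1, y) :: rest) (count + 1)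
      else (v, count)   -- unreachable: visited is rows×cols and (x, y) passed the bounds checks
termination_by 5 * unvisA m v + stack.length
decreasing_by
  · simp only [List.length_cons]; omega
  · push Not at hbad
    obtain ⟨h1, h2, h3, h4, h5, _⟩ := hbad
    have h5' : vget v x y = false := by simpa using h5
    have := unvisA_vset h1 h2 h3 h4 hr.1 hr.2 h5'
    simp only [List.length_cons]
    omega

def stepA (m : List (List Int)) (st : List (List Bool) × List Int) (i j : Int) :
    List (List Bool) × List Int :=
  if mcell m i j = 0 ∧ vget st.1 i j = false then
    let r := dfsA m st.1 [(i, j)] 0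
    (r.1, if 0 < r.2 then st.2 ++ [r.2] else st.2)
  else st

def count_gaps (matrix : List (List Int)) : List Int :=
  ((PySem.List.pyRange 0 (matrix.length : Int)).foldl (fun st i =>
      (PySem.List.pyRange 0 ((matrix.headD []).length : Int)).foldl
        (fun st j => stepA matrix st i j) st)
    (List.replicate matrix.length (List.replicate (matrix.headD []).length false),
     ([] : List Int))).2

-- ===== PORT B =====
-- attach cell c to the existing class labelled k (label[c] = k; members[k].append(c))
def attachB (st : PySem.Dict Cell Cell × PySem.Dict Cell (List Cell)) (c k : Cell) :
    PySem.Dict Cell Cell × PySem.Dict Cell (List Cell) :=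
  (st.1.insert c k, st.2.insert k (st.2.getD k [] ++ [c]))

-- merge the class labelled victim into the class labelled keep, then attach c to keep
-- (the for-loop over members[victim] is the foldl of label[cell] = keep; extend/del/append
-- on members are in-place dict updates, ported as insert/erase/insert)
def mergeB (st : PySem.Dict Cell Cell × PySem.Dict Cell (List Cell)) (c keep victim : Cell) :
    PySem.Dict Cell Cell × PySem.Dict Cell (List Cell) :=
  let mv := st.2.getD victim []
  let L1 := mv.foldl (fun L d => L.insert d keep) st.1
  let M1 := st.2.insert keep (st.2.getD keep [] ++ mv)
  let M2 := M1.erase victim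
  (L1.insert c keep, M2.insert keep (M2.getD keep [] ++ [c]))

-- B's labelling sweep: one cell of the row-major scan (carries the two dicts label/members)
def stepB (m : List (List Int)) (lbl : PySem.Dict Cell Cell) (mem : PySem.Dict Cell (List Cell))
    (i j : Int) : PySem.Dict Cell Cell × PySem.Dict Cell (List Cell) :=
  if mcell m i j ≠ 0 then (lbl, mem)
  else
    match lbl.get? (i - 1, j), lbl.get? (i, j - 1) with
    | none, none => (lbl.insert (i, j) (i, j), mem.insert (i, j) [(i, j)])
    | some k, none => attachB (lbl, mem) (i, j) k
    | none, some k => attachB (lbl, mem) (i, j) k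
    | some ku, some kl =>
      if ku = kl then attachB (lbl, mem) (i, j) ku
      else if (mem.getD ku []).length < (mem.getD kl []).length then mergeB (lbl, mem) (i, j) kl ku
      else mergeB (lbl, mem) (i, j) ku kl

-- B's counting sweep: one cell of the row-major scan
def stepC (lbl : PySem.Dict Cell Cell) (st : PySem.Dict Cell Int × List Cell) (i j : Int) :
    PySem.Dict Cell Int × List Cell :=
  match lbl.get? (i, j) with
  | none => st
  | some lab =>
    let st1 := if st.1.contains lab then st else (st.1.insert lab (0 : Int), st.2 ++ [lab])
    (st1.1.insert lab (st1.1.getD lab 0 + 1), st1.2)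

-- the label/members dicts after B's full labelling sweep (python's `label`, `members`)
def bLabel (matrix : List (List Int)) :
    PySem.Dict Cell Cell × PySem.Dict Cell (List Cell) :=
  (PySem.List.pyRange 0 (matrix.length : Int)).foldl (fun st i =>
      (PySem.List.pyRange 0 ((matrix.headD []).length : Int)).foldl
        (fun st j => stepB matrix st.1 st.2 i j) st)
    (PySem.Dict.empty, PySem.Dict.empty)

-- the counts dict and first-occurrence order after B's counting sweep (python's `counts`, `order`)
def bCounts (matrix : List (List Int)) : PySem.Dict Cell Int × List Cell :=
  (PySem.List.pyRange 0 (matrix.length : Int)).foldl (fun st i =>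
      (PySem.List.pyRange 0 ((matrix.headD []).length : Int)).foldl
        (fun st j => stepC (bLabel matrix).1 st i j) st)
    ((PySem.Dict.empty : PySem.Dict Cell Int), ([] : List Cell))

def count_gaps_alt (matrix : List (List Int)) : List Int :=
  if matrix = [] then []
  else (bCounts matrix).2.map (fun lab => (bCounts matrix).1.getD lab 0)

-- ===== PRECONDITION & SPEC =====
-- Pre_ excludes exactly the ragged matrices on which Python A raises IndexError:
-- some row shorter than row 0 (every cell matrix[i][j], j < len(matrix[0]), is read by A's main loop).
def Pre_count_gaps (matrix : List (List Int)) : Prop :=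
  ∀ row ∈ matrix, (matrix.headD []).length ≤ row.length

instance (matrix : List (List Int)) : Decidable (Pre_count_gaps matrix) := by
  unfold Pre_count_gaps; infer_instance

def pvWitness_count_gaps : List (List Int) := [[0, 1], [0, 0]]

def Spec_count_gaps (matrix : List (List Int)) (out : List Int) : Prop := out = count_gaps_alt matrix
instance (matrix : List (List Int)) (out : List Int) : Decidable (Spec_count_gaps matrix out) := by
  unfold Spec_count_gaps; infer_instance

-- ===== CLAIM (what is proved, stated in full; the proofs are below) =====
def Claim_equal_count_gaps : Prop := ∀ (matrix : List (List Int)), Dom_count_gaps matrix → Pre_count_gaps matrix → Spec_count_gaps matrix (count_gaps matrix)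

-- ===== LEMMAS AND PROOFS =====

def Inb (m : List (List Int)) (c : Cell) : Prop :=
  0 ≤ c.1 ∧ c.1 < (m.length : Int) ∧ 0 ≤ c.2 ∧ c.2 < ((m.headD []).length : Int)

def GoodC (m : List (List Int)) (c : Cell) : Prop := Inb m c ∧ mcell m c.1 c.2 = 0

-- the Python neighbour tuple ((x-1,y),(x+1,y),(x,y-1),(x,y+1))
def nbrsOf (c : Cell) : List Cell :=
  [(c.1 - 1, c.2), (c.1 + 1, c.2), (c.1, c.2 - 1), (c.1, c.2 + 1)]

-- reachability through in-bounds zero cells (target-good steps, as A's dfs explores)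
def Rch (m : List (List Int)) : Cell → Cell → Prop :=
  Relation.ReflTransGen (fun a b => b ∈ nbrsOf a ∧ GoodC m b)

-- connectivity restricted to a set P of cells (both endpoints of every edge good and in P)
def EdgeP (m : List (List Int)) (P : List Cell) (a b : Cell) : Prop :=
  b ∈ nbrsOf a ∧ GoodC m a ∧ GoodC m b ∧ a ∈ P ∧ b ∈ P

def ConP (m : List (List Int)) (P : List Cell) : Cell → Cell → Prop :=
  Relation.ReflTransGen (EdgeP m P)

-- a good neighbour of c that is already in P
def NbP (m : List (List Int)) (P : List Cell) (c u : Cell) : Prop :=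
  u ∈ nbrsOf c ∧ GoodC m u ∧ u ∈ P

-- first-occurrence list of the labels of P's cells (row-major discovery order)
def labOrder (lbl : PySem.Dict Cell Cell) (P : List Cell) : List Cell :=
  (P.filterMap (fun d => lbl.get? d)).foldl (fun acc lab => if lab ∈ acc then acc else acc ++ [lab]) []

def labSize (m : List (List Int)) (lbl : PySem.Dict Cell Cell) (lab : Cell) : Int :=
  ((gridCells m).countP (fun d => lbl.get? d == some lab) : Int)

-- invariants of B's labelling sweep after the scan prefix P
structure InvB (m : List (List Int)) (P : List Cell)
    (L : PySem.Dict Cell Cell) (M : PySem.Dict Cell (List Cell)) : Prop where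
  some_iff : ∀ c, (L.get? c).isSome ↔ (GoodC m c ∧ c ∈ P)
  classes : ∀ a b, GoodC m a → a ∈ P → GoodC m b → b ∈ P → (L.get? a = L.get? b ↔ ConP m P a b)
  rep : ∀ d v, L.get? d = some v → L.get? v = some v
  memSome : ∀ lab, (M.get? lab).isSome ↔ ∃ d, L.get? d = some lab
  memExact : ∀ lab lst, M.get? lab = some lst → ∀ d, (d ∈ lst ↔ L.get? d = some lab)

-- invariant coupling A's fold state (visited, sectors) to the final label dict
def RectV (m : List (List Int)) (v : List (List Bool)) : Prop :=
  v.length = m.length ∧ ∀ row ∈ v, row.length = (m.headD []).length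

def InvA (m : List (List Int)) (lbl : PySem.Dict Cell Cell) (P : List Cell)
    (st : List (List Bool) × List Int) : Prop :=
  RectV m st.1 ∧
  (∀ c : Cell, Inb m c → (vget st.1 c.1 c.2 = true ↔ ∃ e ∈ P, GoodC m e ∧ Rch m e c)) ∧
  st.2 = (labOrder lbl P).map (labSize m lbl)

-- invariant of B's counting sweep after the scan prefix P
def InvC (lbl : PySem.Dict Cell Cell) (P : List Cell) (st : PySem.Dict Cell Int × List Cell) : Prop :=
  st.2 = labOrder lbl P ∧
  (∀ lab, st.1.getD lab 0 = (P.countP (fun d => lbl.get? d == some lab) : Int)) ∧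
  (∀ lab, st.1.contains lab = true ↔ ∃ d ∈ P, lbl.get? d = some lab)

-- ---------- generic list lemmas ----------

lemma foldl_flatMap {α β σ : Type} (l : List α) (g : α → List β) (f : σ → β → σ) (init : σ) :
    (l.flatMap g).foldl f init = l.foldl (fun s a => (g a).foldl f s) init := by
  induction l generalizing init with
  | nil => rfl
  | cons a t ih => simp [List.flatMap_cons, List.foldl_append, ih]

lemma fold2_eq {σ : Type} (R C : Nat) (f : σ → Int → Int → σ) (init : σ) :
    (PySem.List.pyRange 0 (R : Int) 1).foldl (fun st i =>
        (PySem.List.pyRange 0 (C : Int) 1).foldl (fun st j => f st i j) st) init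
      = ((List.range R).flatMap (fun (i : Nat) =>
          (List.range C).map (fun (j : Nat) => ((i : Int), (j : Int))))).foldl
          (fun st c => f st c.1 c.2) init := by
  rw [foldl_flatMap]
  have hR : PySem.List.pyRange 0 (R : Int) 1 = (List.range R).map (fun k : Nat => (k : Int)) := by
    rw [PySem.List.pyRange_one]
    simp
  have hC : PySem.List.pyRange 0 (C : Int) 1 = (List.range C).map (fun k : Nat => (k : Int)) := by
    rw [PySem.List.pyRange_one]
    simp
  rw [hR]
  rw [List.foldl_map]
  apply List.foldl_ext
  intro st i _
  rw [hC, List.foldl_map, List.foldl_map]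

lemma countP_sub {α : Type} (l : List α) (p q : α → Bool) (h : ∀ d ∈ l, q d = true → p d = true) :
    l.countP (fun d => !q d) = l.countP (fun d => !p d) + l.countP (fun d => p d && !q d) := by
  induction l with
  | nil => rfl
  | cons a t ih =>
    have ha := h a List.mem_cons_self
    have ih' := ih (fun d hd => h d (List.mem_cons_of_mem _ hd))
    simp only [List.countP_cons]
    cases hq : q a <;> cases hp : p a <;> simp_all <;> omega

lemma mem_dedupFoldl (l : List Cell) :
    ∀ (acc : List Cell) (x : Cell),
      x ∈ l.foldl (fun acc lab => if lab ∈ acc then acc else acc ++ [lab]) acc ↔ x ∈ acc ∨ x ∈ l := by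
  induction l with
  | nil => intro acc x; simp
  | cons a t ih =>
    intro acc x
    simp only [List.foldl_cons]
    by_cases ha : a ∈ acc
    · rw [if_pos ha, ih]
      constructor
      · rintro (h | h)
        · exact Or.inl h
        · exact Or.inr (List.mem_cons_of_mem _ h)
      · rintro (h | h)
        · exact Or.inl h
        · rcases List.mem_cons.1 h with rfl | h
          · exact Or.inl ha
          · exact Or.inr h
    · rw [if_neg ha, ih]
      simp only [List.mem_append, List.mem_singleton, List.mem_cons]
      tauto

lemma mem_labOrder {lbl : PySem.Dict Cell Cell} {P : List Cell} {lab : Cell} :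
    lab ∈ labOrder lbl P ↔ ∃ d ∈ P, lbl.get? d = some lab := by
  unfold labOrder
  refine Iff.trans (mem_dedupFoldl _ _ _) ?_
  simp [List.mem_filterMap]

lemma labOrder_append_none {lbl : PySem.Dict Cell Cell} {P : List Cell} {c : Cell}
    (h : lbl.get? c = none) : labOrder lbl (P ++ [c]) = labOrder lbl P := by
  unfold labOrder
  rw [List.filterMap_append, List.foldl_append]
  simp [h]

lemma labOrder_append_some {lbl : PySem.Dict Cell Cell} {P : List Cell} {c lab : Cell}
    (h : lbl.get? c = some lab) :
    labOrder lbl (P ++ [c]) =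
      if lab ∈ labOrder lbl P then labOrder lbl P else labOrder lbl P ++ [lab] := by
  unfold labOrder
  rw [List.filterMap_append, List.foldl_append]
  simp [h]

-- ---------- adjacency facts ----------

lemma nbrs_symm {a b : Cell} : b ∈ nbrsOf a ↔ a ∈ nbrsOf b := by
  obtain ⟨x, y⟩ := a; obtain ⟨u, v⟩ := b
  simp only [nbrsOf, List.mem_cons, List.not_mem_nil, or_false, Prod.mk.injEq]
  omega

lemma nbrs_ne {a b : Cell} (h : b ∈ nbrsOf a) : b ≠ a := by
  obtain ⟨x, y⟩ := a; obtain ⟨u, v⟩ := b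
  simp only [nbrsOf, List.mem_cons, List.not_mem_nil, or_false, Prod.mk.injEq] at h
  intro hc
  obtain ⟨e1, e2⟩ := Prod.mk.injEq .. ▸ hc
  omega

-- row-major position of a cell
def pidx (m : List (List Int)) (c : Cell) : Int := c.1 * ((m.headD []).length : Int) + c.2

lemma pairwise_gridCells {m : List (List Int)} :
    (gridCells m).Pairwise (fun a b => pidx m a < pidx m b) := by
  rw [gridCells, List.pairwise_flatMap]
  constructor
  · intro i _
    refine List.Pairwise.map _ ?_ (List.pairwise_lt_range (n := (m.headD []).length))
    intro a b hab
    simp only [pidx]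
    omega
  · refine (List.pairwise_lt_range).imp ?_
    intro i j hij x hx y hy
    obtain ⟨a, ha, rfl⟩ := List.mem_map.1 hx
    obtain ⟨b, hb, rfl⟩ := List.mem_map.1 hy
    rw [List.mem_range] at ha hb
    simp only [pidx]
    have : (i : Int) < j := by exact_mod_cast hij
    have hb' : (b : Int) < ((m.headD []).length : Int) := by exact_mod_cast hb
    nlinarith [Int.natCast_nonneg a, Int.natCast_nonneg b]

lemma mem_prefix_iff_pidx {m : List (List Int)} {P S : List Cell} {c : Cell}
    (hsplit : gridCells m = P ++ c :: S) {d : Cell} (hd : d ∈ gridCells m) :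
    d ∈ P ↔ pidx m d < pidx m c := by
  have hpw := pairwise_gridCells (m := m)
  rw [hsplit] at hpw hd
  rcases List.pairwise_append.1 hpw with ⟨_, hpw2, hcross⟩
  constructor
  · intro hdP
    exact hcross d hdP c List.mem_cons_self
  · intro hlt
    rcases List.mem_append.1 hd with h | h
    · exact h
    · rcases List.mem_cons.1 h with rfl | h'
      · omega
      · have := (List.pairwise_cons.1 hpw2).1 d h'
        omega

-- in a row-major prefix, the in-bounds neighbours of the next cell c that are already
-- processed are exactly the up and left neighbours
lemma nbr_prefix_iff {m : List (List Int)} {P S : List Cell} {c : Cell}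
    (hsplit : gridCells m = P ++ c :: S) {d : Cell} (hnb : d ∈ nbrsOf c) (hInb : Inb m d) :
    d ∈ P ↔ (d = (c.1 - 1, c.2) ∨ d = (c.1, c.2 - 1)) := by
  have hdscan : d ∈ gridCells m := mem_gridCells.2 hInb
  have hcscan : c ∈ gridCells m := by rw [hsplit]; exact List.mem_append.2 (Or.inr List.mem_cons_self)
  have hcInb : Inb m c := mem_gridCells.1 hcscan
  rw [mem_prefix_iff_pidx hsplit hdscan]
  obtain ⟨x, y⟩ := c
  obtain ⟨dx, dy⟩ := d
  obtain ⟨h1, h2, h3, h4⟩ := hInb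
  obtain ⟨g1, g2, g3, g4⟩ := hcInb
  simp only [nbrsOf, List.mem_cons, List.not_mem_nil, or_false, Prod.mk.injEq] at hnb
  simp only [pidx, Prod.mk.injEq]
  simp only at h1 h2 h3 h4 g1 g2 g3 g4
  have em : (x - 1) * ((m.headD []).length : Int) = x * ((m.headD []).length : Int) - ((m.headD []).length : Int) := by ring
  have ep : (x + 1) * ((m.headD []).length : Int) = x * ((m.headD []).length : Int) + ((m.headD []).length : Int) := by ring
  rcases hnb with ⟨e1, e2⟩ | ⟨e1, e2⟩ | ⟨e1, e2⟩ | ⟨e1, e2⟩ <;> subst e1 <;> subst e2 <;>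
    constructor <;> intro h <;> omega

-- ---------- ConP machinery ----------

lemma conP_mono {m : List (List Int)} {P Q : List Cell} (hPQ : ∀ x, x ∈ P → x ∈ Q)
    {a b : Cell} (h : ConP m P a b) : ConP m Q a b := by
  refine Relation.ReflTransGen.mono ?_ h
  rintro x y ⟨h1, h2, h3, h4, h5⟩
  exact ⟨h1, h2, h3, hPQ _ h4, hPQ _ h5⟩

lemma edgeP_symm {m : List (List Int)} {P : List Cell} {a b : Cell}
    (h : EdgeP m P a b) : EdgeP m P b a := by
  obtain ⟨h1, h2, h3, h4, h5⟩ := h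
  exact ⟨nbrs_symm.1 h1, h3, h2, h5, h4⟩

lemma conP_symm {m : List (List Int)} {P : List Cell} {a b : Cell}
    (h : ConP m P a b) : ConP m P b a := by
  induction h with
  | refl => exact Relation.ReflTransGen.refl
  | tail _ hstep ih => exact Relation.ReflTransGen.head (edgeP_symm hstep) ih

lemma conP_to_rch {m : List (List Int)} {P : List Cell} {a b : Cell}
    (h : ConP m P a b) : Rch m a b := by
  refine Relation.ReflTransGen.mono ?_ h
  rintro x y ⟨h1, _, h3, _, _⟩
  exact ⟨h1, h3⟩

lemma rch_good_target {m : List (List Int)} {a b : Cell} (h : Rch m a b) :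
    b = a ∨ GoodC m b := by
  induction h with
  | refl => exact Or.inl rfl
  | tail _ hstep _ => exact Or.inr hstep.2

lemma rch_to_conP {m : List (List Int)} {a b : Cell} (hga : GoodC m a) (h : Rch m a b) :
    b = a ∨ (GoodC m b ∧ ConP m (gridCells m) a b) := by
  induction h with
  | refl => exact Or.inl rfl
  | tail hab' hstep ih =>
    rename_i b' b
    have hgb : GoodC m b := hstep.2
    have hb'good : GoodC m b' := by
      rcases ih with rfl | ⟨hg, _⟩
      · exact hga
      · exact hg
    have hedge : EdgeP m (gridCells m) b' b :=
      ⟨hstep.1, hb'good, hgb, mem_gridCells.2 hb'good.1, mem_gridCells.2 hgb.1⟩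
    rcases ih with rfl | ⟨_, hcon⟩
    · exact Or.inr ⟨hgb, Relation.ReflTransGen.single hedge⟩
    · exact Or.inr ⟨hgb, Relation.ReflTransGen.tail hcon hedge⟩

-- the structure of connectivity after adding one vertex c at the end of the prefix
lemma conP_snoc_fwd {m : List (List Int)} {P : List Cell} {c a b : Cell}
    (h : ConP m (P ++ [c]) a b) :
    (a = c → (b = c ∨ ∃ v, NbP m P c v ∧ ConP m P v b)) ∧
    (a ≠ c → (b = c → ∃ u, NbP m P c u ∧ ConP m P a u) ∧
             (b ≠ c → ConP m P a b ∨
               ∃ u v, NbP m P c u ∧ NbP m P c v ∧ ConP m P a u ∧ ConP m P v b)) := by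
  induction h with
  | refl =>
    constructor
    · intro hac; exact Or.inl hac
    · intro hac
      constructor
      · intro hbc; exact absurd hbc hac
      · intro _; exact Or.inl Relation.ReflTransGen.refl
  | tail hab' hstep ih =>
    rename_i b' b
    obtain ⟨hnb, hgb', hgb, hmb', hmb⟩ := hstep
    by_cases hb'c : b' = c
    · subst hb'c
      have hbne : b ≠ b' := nbrs_ne hnb
      have hbP : b ∈ P := by
        rcases List.mem_append.1 hmb with h | h
        · exact h
        · rcases List.mem_cons.1 h with rfl | h'
          · exact absurd rfl hbne
          · cases h'
      have hnbb : NbP m P b' b := ⟨hnb, hgb, hbP⟩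
      constructor
      · intro _; exact Or.inr ⟨b, hnbb, Relation.ReflTransGen.refl⟩
      · intro hac
        constructor
        · intro hbc; exact absurd hbc hbne
        · intro _
          rcases (ih.2 hac).1 rfl with ⟨u, hu, hau⟩
          exact Or.inr ⟨u, b, hu, hnbb, hau, Relation.ReflTransGen.refl⟩
    · have hb'P : b' ∈ P := by
        rcases List.mem_append.1 hmb' with h | h
        · exact h
        · rcases List.mem_cons.1 h with rfl | h'
          · exact absurd rfl hb'c
          · cases h'
      by_cases hbc : b = c
      · have hnbb' : NbP m P c b' := ⟨nbrs_symm.1 (hbc ▸ hnb), hgb', hb'P⟩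
        constructor
        · intro _; exact Or.inl hbc
        · intro hac
          constructor
          · intro _
            rcases (ih.2 hac).2 hb'c with hcon | ⟨u, v, hu, hv, hau, hvb'⟩
            · exact ⟨b', hnbb', hcon⟩
            · exact ⟨u, hu, hau⟩
          · intro hbc'; exact absurd hbc hbc'
      · have hbP : b ∈ P := by
          rcases List.mem_append.1 hmb with h | h
          · exact h
          · rcases List.mem_cons.1 h with rfl | h'
            · exact absurd rfl hbc
            · cases h'
        have hedge : EdgeP m P b' b := ⟨hnb, hgb', hgb, hb'P, hbP⟩
        constructor
        · intro hac
          subst hac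
          rcases ih.1 rfl with rfl | ⟨v, hv, hvb'⟩
          · exact absurd rfl hb'c
          · exact Or.inr ⟨v, hv, Relation.ReflTransGen.tail hvb' hedge⟩
        · intro hac
          constructor
          · intro hbc'; exact absurd hbc' hbc
          · intro _
            rcases (ih.2 hac).2 hb'c with hcon | ⟨u, v, hu, hv, hau, hvb'⟩
            · exact Or.inl (Relation.ReflTransGen.tail hcon hedge)
            · exact Or.inr ⟨u, v, hu, hv, hau, Relation.ReflTransGen.tail hvb' hedge⟩

lemma conP_snoc_from_c {m : List (List Int)} {P : List Cell} {c v b : Cell}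
    (hgc : GoodC m c) (hv : NbP m P c v) (h : ConP m P v b) : ConP m (P ++ [c]) c b := by
  obtain ⟨hvn, hvg, hvP⟩ := hv
  have hedge : EdgeP m (P ++ [c]) c v :=
    ⟨hvn, hgc, hvg, List.mem_append.2 (Or.inr List.mem_cons_self), List.mem_append.2 (Or.inl hvP)⟩
  exact Relation.ReflTransGen.head hedge (conP_mono (fun x hx => List.mem_append.2 (Or.inl hx)) h)

lemma conP_snoc_via {m : List (List Int)} {P : List Cell} {c a b u v : Cell}
    (hgc : GoodC m c) (hu : NbP m P c u) (hv : NbP m P c v)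
    (h1 : ConP m P a u) (h2 : ConP m P v b) : ConP m (P ++ [c]) a b := by
  obtain ⟨hun, hug, huP⟩ := hu
  have hedge : EdgeP m (P ++ [c]) u c :=
    ⟨nbrs_symm.1 hun, hug, hgc, List.mem_append.2 (Or.inl huP),
      List.mem_append.2 (Or.inr List.mem_cons_self)⟩
  have hl : ConP m (P ++ [c]) a u := conP_mono (fun x hx => List.mem_append.2 (Or.inl hx)) h1
  exact Relation.ReflTransGen.trans (Relation.ReflTransGen.tail hl hedge) (conP_snoc_from_c hgc hv h2)

lemma conP_snoc_not_good {m : List (List Int)} {P : List Cell} {c a b : Cell}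
    (hng : ¬GoodC m c) : ConP m (P ++ [c]) a b ↔ ConP m P a b := by
  constructor
  · intro h
    induction h with
    | refl => exact Relation.ReflTransGen.refl
    | tail hab' hstep ih =>
      obtain ⟨hnb, hgb', hgb, hmb', hmb⟩ := hstep
      have h1 : ∀ x : Cell, GoodC m x → x ∈ P ++ [c] → x ∈ P := by
        intro x hgx hx
        rcases List.mem_append.1 hx with h | h
        · exact h
        · rcases List.mem_cons.1 h with rfl | h'
          · exact absurd hgx hng
          · cases h'
      exact Relation.ReflTransGen.tail ih ⟨hnb, hgb', hgb, h1 _ hgb' hmb', h1 _ hgb hmb⟩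
  · exact conP_mono (fun x hx => List.mem_append.2 (Or.inl hx))

-- ---------- Dict helper lemmas ----------

lemma dict_get?_erase {κ ν : Type} [BEq κ] [LawfulBEq κ] [DecidableEq κ]
    (d : PySem.Dict κ ν) (k x : κ) :
    (d.erase k).get? x = if x = k then none else d.get? x := by
  obtain ⟨items⟩ := d
  simp only [PySem.Dict.erase, PySem.Dict.get?]
  induction items with
  | nil => simp
  | cons p t ih =>
    rw [List.filter_cons]
    by_cases hpk : p.1 = k
    · have h1 : (!(p.1 == k)) = false := by simp [hpk]
      rw [h1]
      simp only [Bool.false_eq_true, if_false]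
      rw [ih]
      by_cases hxk : x = k
      · simp [hxk]
      · have h2 : (p.1 == x) = false := by
          refine beq_eq_false_iff_ne.2 ?_
          intro h; exact hxk (h ▸ hpk ▸ rfl)
        rw [if_neg hxk, if_neg hxk, List.find?_cons, h2]
    · have h1 : (!(p.1 == k)) = true := by simp [hpk]
      rw [h1]
      simp only [if_true]
      by_cases hpx : p.1 = x
      · have hxk : ¬ x = k := fun h => hpk (hpx.trans h)
        have h2 : (p.1 == x) = true := beq_iff_eq.2 hpx
        rw [if_neg hxk, List.find?_cons, List.find?_cons, h2]
      · have h2 : (p.1 == x) = false := beq_eq_false_iff_ne.2 hpx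
        rw [List.find?_cons, h2, ih]
        by_cases hxk : x = k
        · simp [hxk]
        · rw [if_neg hxk, if_neg hxk, List.find?_cons, h2]

lemma get?_foldl_insert_const {κ ν : Type} [BEq κ] [LawfulBEq κ] [DecidableEq κ]
    (l : List κ) (w : ν) :
    ∀ (d : PySem.Dict κ ν) (x : κ),
      (l.foldl (fun L e => L.insert e w) d).get? x = if x ∈ l then some w else d.get? x := by
  induction l with
  | nil => intro d x; simp
  | cons e t ih =>
    intro d x
    simp only [List.foldl_cons]
    rw [ih]
    by_cases hxt : x ∈ t
    · simp [hxt, List.mem_cons.2 (Or.inr hxt)]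
    · rw [if_neg hxt, PySem.Dict.get?_insert]
      by_cases hxe : x = e
      · simp [hxe]
      · have : x ∉ (e :: t) := by
          intro h; rcases List.mem_cons.1 h with h' | h' <;> [exact hxe h'; exact hxt h']
        simp [hxe, hxt, this]

-- ---------- InvB: the labelling sweep ----------

lemma invB_init {m : List (List Int)} : InvB m [] PySem.Dict.empty PySem.Dict.empty := by
  refine ⟨?_, ?_, ?_, ?_, ?_⟩
  · intro c; simp [PySem.Dict.get?_empty]
  · intro a b _ ha; cases ha
  · intro d v h; rw [PySem.Dict.get?_empty] at h; cases h
  · intro lab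
    simp [PySem.Dict.get?_empty]
  · intro lab lst h; rw [PySem.Dict.get?_empty] at h; cases h

-- basic facts available at every step of the labelling sweep
lemma invB_cP {m : List (List Int)} {P S : List Cell} {c : Cell}
    (hsplit : gridCells m = P ++ c :: S) : c ∉ P := by
  have hnd := nodup_gridCells (m := m)
  rw [hsplit] at hnd
  have hdisj := List.disjoint_of_nodup_append hnd
  exact fun hc => hdisj hc List.mem_cons_self

lemma invB_none_c {m : List (List Int)} {P : List Cell} {c : Cell}
    {L : PySem.Dict Cell Cell}
    (hsome : ∀ x, (L.get? x).isSome ↔ (GoodC m x ∧ x ∈ P)) (hcP : c ∉ P) :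
    L.get? c = none := by
  cases hx : L.get? c with
  | none => rfl
  | some v =>
    have := (hsome c).1 (by rw [hx]; rfl)
    exact absurd this.2 hcP

lemma invB_val_ne_c {c : Cell} {L : PySem.Dict Cell Cell}
    (hrep : ∀ d v, L.get? d = some v → L.get? v = some v)
    (hNone_c : L.get? c = none) : ∀ d v, L.get? d = some v → v ≠ c := by
  intro d v hd hvc
  rw [hvc] at hd
  have h2 := hrep d c hd
  rw [hNone_c] at h2
  cases h2

lemma memP_snoc {P : List Cell} {c x : Cell} (hx : x ∈ P ++ [c]) (hxc : x ≠ c) : x ∈ P := by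
  rcases List.mem_append.1 hx with h' | h'
  · exact h'
  · rcases List.mem_cons.1 h' with rfl | h''
    · exact absurd rfl hxc
    · cases h''

-- attaching c to one existing class k (all processed good neighbours of c carry label k)
lemma invB_attach {m : List (List Int)} {P S : List Cell} {c : Cell}
    (hsplit : gridCells m = P ++ c :: S) (hgc : GoodC m c)
    {L : PySem.Dict Cell Cell} {M : PySem.Dict Cell (List Cell)} (h : InvB m P L M)
    {k : Cell}
    (hNbLab : ∀ u, NbP m P c u → L.get? u = some k)
    (hex : ∃ u, NbP m P c u ∧ L.get? u = some k) :
    InvB m (P ++ [c]) (attachB (L, M) c k).1 (attachB (L, M) c k).2 := by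
  obtain ⟨hsome, hclasses, hrep, hmemSome, hmemExact⟩ := h
  obtain ⟨u0, hu0, hu0k⟩ := hex
  have hcP : c ∉ P := invB_cP hsplit
  have hNone_c : L.get? c = none := invB_none_c hsome hcP
  have hval_ne_c := invB_val_ne_c hrep hNone_c
  have hLk : L.get? k = some k := hrep u0 k hu0k
  have hkc : k ≠ c := hval_ne_c u0 k hu0k
  have hu0c : u0 ≠ c := by
    intro h'
    rw [h', hNone_c] at hu0k
    cases hu0k
  obtain ⟨mk, hMk⟩ : ∃ mk, M.get? k = some mk :=
    Option.isSome_iff_exists.1 ((hmemSome k).2 ⟨u0, hu0k⟩)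
  have hEx := hmemExact k mk hMk
  have hL' : ∀ x : Cell, ((attachB (L, M) c k).1.get? x) = if x = c then some k else L.get? x := by
    intro x
    show (L.insert c k).get? x = _
    rw [PySem.Dict.get?_insert]
  have hM' : ∀ x : Cell, ((attachB (L, M) c k).2.get? x)
      = if x = k then some (mk ++ [c]) else M.get? x := by
    intro x
    show (M.insert k (M.getD k [] ++ [c])).get? x = _
    have hgd : M.getD k [] = mk := by rw [PySem.Dict.getD_eq_get?_getD, hMk]; rfl
    rw [hgd, PySem.Dict.get?_insert]
  have haux : ∀ b', GoodC m b' → b' ∈ P → (L.get? b' = some k ↔ ConP m P u0 b') := by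
    intro b' hgb' hb'P
    rw [← hu0k]
    exact Iff.trans eq_comm (hclasses u0 b' hu0.2.1 hu0.2.2 hgb' hb'P)
  refine ⟨?_, ?_, ?_, ?_, ?_⟩
  · -- some_iff
    intro x
    rw [hL' x]
    by_cases hxc : x = c
    · rw [if_pos hxc, hxc]
      exact iff_of_true rfl ⟨hgc, List.mem_append.2 (Or.inr List.mem_cons_self)⟩
    · rw [if_neg hxc, hsome x]
      constructor
      · rintro ⟨hg, hP⟩
        exact ⟨hg, List.mem_append.2 (Or.inl hP)⟩
      · rintro ⟨hg, hP'⟩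
        exact ⟨hg, memP_snoc hP' hxc⟩
  · -- classes
    intro a b hga haP' hgb hbP'
    by_cases hac : a = c <;> by_cases hbc : b = c
    · rw [hac, hbc, hL' c, if_pos rfl]
      exact iff_of_true rfl Relation.ReflTransGen.refl
    · have hbP : b ∈ P := memP_snoc hbP' hbc
      rw [hac, hL' c, hL' b, if_pos rfl, if_neg hbc, eq_comm, haux b hgb hbP]
      constructor
      · intro hcon
        exact conP_snoc_from_c hgc hu0 hcon
      · intro hcon
        rcases (conP_snoc_fwd hcon).1 rfl with hbceq | ⟨v, hv, hvb⟩
        · exact absurd hbceq hbc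
        · have h2 : ConP m P u0 v := (haux v hv.2.1 hv.2.2).1 (hNbLab v hv)
          exact Relation.ReflTransGen.trans h2 hvb
    · have haP : a ∈ P := memP_snoc haP' hac
      rw [hbc, hL' a, hL' c, if_neg hac, if_pos rfl, haux a hga haP]
      constructor
      · intro hcon
        exact conP_symm (conP_snoc_from_c hgc hu0 hcon)
      · intro hcon
        have hcon' := conP_symm hcon
        rcases (conP_snoc_fwd hcon').1 rfl with haceq | ⟨v, hv, hva⟩
        · exact absurd haceq hac
        · have h2 : ConP m P u0 v := (haux v hv.2.1 hv.2.2).1 (hNbLab v hv)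
          exact Relation.ReflTransGen.trans h2 hva
    · have haP : a ∈ P := memP_snoc haP' hac
      have hbP : b ∈ P := memP_snoc hbP' hbc
      rw [hL' a, hL' b, if_neg hac, if_neg hbc, hclasses a b hga haP hgb hbP]
      constructor
      · exact conP_mono (fun x hx => List.mem_append.2 (Or.inl hx))
      · intro hcon
        rcases (conP_snoc_fwd hcon).2 hac with ⟨_, h2⟩
        rcases h2 hbc with hcon' | ⟨u, v, hu, hv, hau, hvb⟩
        · exact hcon'
        · have hau' : L.get? a = L.get? u := (hclasses a u hga haP hu.2.1 hu.2.2).2 hau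
          have hvb' : L.get? v = L.get? b := (hclasses v b hv.2.1 hv.2.2 hgb hbP).2 hvb
          have heq : L.get? a = L.get? b := by
            rw [hau', hNbLab u hu, ← hNbLab v hv, hvb']
          exact (hclasses a b hga haP hgb hbP).1 heq
  · -- rep
    intro d v hd
    rw [hL' d] at hd
    by_cases hdc : d = c
    · rw [if_pos hdc] at hd
      have hv : v = k := (Option.some.inj hd).symm
      rw [hv, hL' k, if_neg hkc]
      exact hLk
    · rw [if_neg hdc] at hd
      have hvne : v ≠ c := hval_ne_c d v hd
      rw [hL' v, if_neg hvne]
      exact hrep d v hd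
  · -- memSome
    intro lab
    rw [hM' lab]
    by_cases hlk : lab = k
    · rw [if_pos hlk]
      refine iff_of_true rfl ⟨u0, ?_⟩
      rw [hL' u0, if_neg hu0c, hlk]
      exact hu0k
    · rw [if_neg hlk, hmemSome lab]
      constructor
      · rintro ⟨d, hd⟩
        have hdc : d ≠ c := by
          intro h'
          rw [h', hNone_c] at hd
          cases hd
        exact ⟨d, by rw [hL' d, if_neg hdc]; exact hd⟩
      · rintro ⟨d, hd⟩
        rw [hL' d] at hd
        by_cases hdc : d = c
        · rw [if_pos hdc] at hd
          exact absurd (Option.some.inj hd).symm hlk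
        · rw [if_neg hdc] at hd
          exact ⟨d, hd⟩
  · -- memExact
    intro lab lst hlst
    rw [hM' lab] at hlst
    by_cases hlk : lab = k
    · rw [if_pos hlk] at hlst
      obtain rfl := Option.some.inj hlst
      intro d
      rw [hL' d, hlk]
      by_cases hdc : d = c
      · rw [if_pos hdc, hdc]
        exact iff_of_true (List.mem_append.2 (Or.inr List.mem_cons_self)) rfl
      · rw [if_neg hdc, List.mem_append]
        constructor
        · rintro (h' | h')
          · exact (hEx d).1 h'
          · rcases List.mem_cons.1 h' with rfl | h''
            · exact absurd rfl hdc
            · cases h''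
        · intro h'
          exact Or.inl ((hEx d).2 h')
    · rw [if_neg hlk] at hlst
      have hEx2 := hmemExact lab lst hlst
      intro d
      rw [hL' d]
      by_cases hdc : d = c
      · rw [if_pos hdc, hdc]
        refine iff_of_false ?_ ?_
        · intro h'
          have h2 := (hEx2 c).1 h'
          rw [hNone_c] at h2
          cases h2
        · intro h'
          exact hlk (Option.some.inj h').symm
      · rw [if_neg hdc]
        exact hEx2 d

-- a fresh class at c (no processed good neighbour)
lemma invB_fresh {m : List (List Int)} {P S : List Cell} {c : Cell}
    (hsplit : gridCells m = P ++ c :: S) (hgc : GoodC m c)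
    {L : PySem.Dict Cell Cell} {M : PySem.Dict Cell (List Cell)} (h : InvB m P L M)
    (hnb : ∀ u, ¬ NbP m P c u) :
    InvB m (P ++ [c]) (L.insert c c) (M.insert c [c]) := by
  obtain ⟨hsome, hclasses, hrep, hmemSome, hmemExact⟩ := h
  have hcP : c ∉ P := invB_cP hsplit
  have hNone_c : L.get? c = none := invB_none_c hsome hcP
  have hval_ne_c := invB_val_ne_c hrep hNone_c
  have hL' : ∀ x : Cell, ((L.insert c c).get? x) = if x = c then some c else L.get? x := by
    intro x
    rw [PySem.Dict.get?_insert]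
  have hM' : ∀ x : Cell, ((M.insert c [c]).get? x) = if x = c then some [c] else M.get? x := by
    intro x
    rw [PySem.Dict.get?_insert]
  refine ⟨?_, ?_, ?_, ?_, ?_⟩
  · intro x
    rw [hL' x]
    by_cases hxc : x = c
    · rw [if_pos hxc, hxc]
      exact iff_of_true rfl ⟨hgc, List.mem_append.2 (Or.inr List.mem_cons_self)⟩
    · rw [if_neg hxc, hsome x]
      constructor
      · rintro ⟨hg, hP⟩
        exact ⟨hg, List.mem_append.2 (Or.inl hP)⟩
      · rintro ⟨hg, hP'⟩
        exact ⟨hg, memP_snoc hP' hxc⟩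
  · intro a b hga haP' hgb hbP'
    by_cases hac : a = c <;> by_cases hbc : b = c
    · rw [hac, hbc, hL' c, if_pos rfl]
      exact iff_of_true rfl Relation.ReflTransGen.refl
    · have hbP : b ∈ P := memP_snoc hbP' hbc
      rw [hac, hL' c, hL' b, if_pos rfl, if_neg hbc]
      refine iff_of_false ?_ ?_
      · intro h'
        obtain ⟨vb, hvb⟩ := Option.isSome_iff_exists.1 ((hsome b).2 ⟨hgb, hbP⟩)
        rw [hvb] at h'
        exact hval_ne_c b vb hvb (Option.some.inj h'.symm)
      · intro hcon
        rcases (conP_snoc_fwd hcon).1 rfl with hbceq | ⟨v, hv, _⟩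
        · exact hbc hbceq
        · exact hnb v hv
    · have haP : a ∈ P := memP_snoc haP' hac
      rw [hbc, hL' a, hL' c, if_neg hac, if_pos rfl]
      refine iff_of_false ?_ ?_
      · intro h'
        obtain ⟨va, hva⟩ := Option.isSome_iff_exists.1 ((hsome a).2 ⟨hga, haP⟩)
        rw [hva] at h'
        exact hval_ne_c a va hva (Option.some.inj h')
      · intro hcon
        rcases (conP_snoc_fwd (conP_symm hcon)).1 rfl with haceq | ⟨v, hv, _⟩
        · exact hac haceq
        · exact hnb v hv
    · have haP : a ∈ P := memP_snoc haP' hac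
      have hbP : b ∈ P := memP_snoc hbP' hbc
      rw [hL' a, hL' b, if_neg hac, if_neg hbc, hclasses a b hga haP hgb hbP]
      constructor
      · exact conP_mono (fun x hx => List.mem_append.2 (Or.inl hx))
      · intro hcon
        rcases (conP_snoc_fwd hcon).2 hac with ⟨_, h2⟩
        rcases h2 hbc with hcon' | ⟨u, v, hu, _, _, _⟩
        · exact hcon'
        · exact absurd hu (hnb u)
  · intro d v hd
    rw [hL' d] at hd
    by_cases hdc : d = c
    · rw [if_pos hdc] at hd
      have hv : v = c := (Option.some.inj hd).symm
      rw [hv, hL' c, if_pos rfl]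
    · rw [if_neg hdc] at hd
      have hvne : v ≠ c := hval_ne_c d v hd
      rw [hL' v, if_neg hvne]
      exact hrep d v hd
  · intro lab
    rw [hM' lab]
    by_cases hlk : lab = c
    · rw [if_pos hlk]
      refine iff_of_true rfl ⟨c, ?_⟩
      rw [hL' c, if_pos rfl, hlk]
    · rw [if_neg hlk, hmemSome lab]
      constructor
      · rintro ⟨d, hd⟩
        have hdc : d ≠ c := by
          intro h'
          rw [h', hNone_c] at hd
          cases hd
        exact ⟨d, by rw [hL' d, if_neg hdc]; exact hd⟩
      · rintro ⟨d, hd⟩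
        rw [hL' d] at hd
        by_cases hdc : d = c
        · rw [if_pos hdc] at hd
          exact absurd (Option.some.inj hd).symm hlk
        · rw [if_neg hdc] at hd
          exact ⟨d, hd⟩
  · intro lab lst hlst
    rw [hM' lab] at hlst
    by_cases hlk : lab = c
    · rw [if_pos hlk] at hlst
      obtain rfl := Option.some.inj hlst
      intro d
      rw [hL' d, hlk]
      by_cases hdc : d = c
      · rw [if_pos hdc, hdc]
        exact iff_of_true List.mem_cons_self rfl
      · rw [if_neg hdc]
        refine iff_of_false ?_ ?_
        · intro h'
          rcases List.mem_cons.1 h' with rfl | h''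
          · exact hdc rfl
          · cases h''
        · intro h'
          exact hval_ne_c d c h' rfl
    · rw [if_neg hlk] at hlst
      have hEx2 := hmemExact lab lst hlst
      intro d
      rw [hL' d]
      by_cases hdc : d = c
      · rw [if_pos hdc, hdc]
        refine iff_of_false ?_ ?_
        · intro h'
          have h2 := (hEx2 c).1 h'
          rw [hNone_c] at h2
          cases h2
        · intro h'
          exact hlk (Option.some.inj h').symm
      · rw [if_neg hdc]
        exact hEx2 d

-- merging the class labelled victim into the class labelled keep, then attaching c
lemma invB_merge {m : List (List Int)} {P S : List Cell} {c : Cell}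
    (hsplit : gridCells m = P ++ c :: S) (hgc : GoodC m c)
    {L : PySem.Dict Cell Cell} {M : PySem.Dict Cell (List Cell)} (h : InvB m P L M)
    {keep victim : Cell} (hkv : keep ≠ victim)
    (hexK : ∃ u, NbP m P c u ∧ L.get? u = some keep)
    (hexV : ∃ u, NbP m P c u ∧ L.get? u = some victim)
    (hNbLab : ∀ u, NbP m P c u → L.get? u = some keep ∨ L.get? u = some victim) :
    InvB m (P ++ [c]) (mergeB (L, M) c keep victim).1 (mergeB (L, M) c keep victim).2 := by
  obtain ⟨hsome, hclasses, hrep, hmemSome, hmemExact⟩ := h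
  obtain ⟨uK, huK, huKk⟩ := hexK
  obtain ⟨uV, huV, huVk⟩ := hexV
  have hcP : c ∉ P := invB_cP hsplit
  have hNone_c : L.get? c = none := invB_none_c hsome hcP
  have hval_ne_c := invB_val_ne_c hrep hNone_c
  have hLkeep : L.get? keep = some keep := hrep uK keep huKk
  have hLvict : L.get? victim = some victim := hrep uV victim huVk
  have hkeepc : keep ≠ c := hval_ne_c uK keep huKk
  have hvictc : victim ≠ c := hval_ne_c uV victim huVk
  have hknv : ¬ (L.get? keep = some victim) := by
    intro h'
    rw [hLkeep] at h'
    exact hkv (Option.some.inj h')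
  obtain ⟨mk, hMk⟩ : ∃ l, M.get? keep = some l :=
    Option.isSome_iff_exists.1 ((hmemSome keep).2 ⟨uK, huKk⟩)
  obtain ⟨mv, hMv⟩ : ∃ l, M.get? victim = some l :=
    Option.isSome_iff_exists.1 ((hmemSome victim).2 ⟨uV, huVk⟩)
  have hExK := hmemExact keep mk hMk
  have hExV := hmemExact victim mv hMv
  have hgdK : M.getD keep [] = mk := by rw [PySem.Dict.getD_eq_get?_getD, hMk]; rfl
  have hgdV : M.getD victim [] = mv := by rw [PySem.Dict.getD_eq_get?_getD, hMv]; rfl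
  have hL1 : ∀ x : Cell, ((M.getD victim []).foldl (fun L d => L.insert d keep) L).get? x
      = if L.get? x = some victim then some keep else L.get? x := by
    intro x
    rw [hgdV, get?_foldl_insert_const]
    by_cases hx : L.get? x = some victim
    · rw [if_pos ((hExV x).2 hx), if_pos hx]
    · rw [if_neg (fun h' => hx ((hExV x).1 h')), if_neg hx]
  have hL' : ∀ x : Cell, (mergeB (L, M) c keep victim).1.get? x
      = if x = c then some keep else if L.get? x = some victim then some keep else L.get? x := by
    intro x
    show (((M.getD victim []).foldl (fun L d => L.insert d keep) L).insert c keep).get? x = _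
    rw [PySem.Dict.get?_insert]
    by_cases hxc : x = c
    · rw [if_pos hxc, if_pos hxc]
    · rw [if_neg hxc, if_neg hxc, hL1 x]
  have hM2getK : ((M.insert keep (M.getD keep [] ++ M.getD victim [])).erase victim).getD keep []
      = mk ++ mv := by
    rw [PySem.Dict.getD_eq_get?_getD, dict_get?_erase, if_neg hkv,
      PySem.Dict.get?_insert, if_pos rfl, hgdK, hgdV]
    rfl
  have hM3 : ∀ x : Cell, (mergeB (L, M) c keep victim).2.get? x
      = if x = keep then some (mk ++ mv ++ [c]) else if x = victim then none else M.get? x := by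
    intro x
    show ((((M.insert keep (M.getD keep [] ++ M.getD victim [])).erase victim)).insert keep
        ((((M.insert keep (M.getD keep [] ++ M.getD victim [])).erase victim)).getD keep []
          ++ [c])).get? x = _
    rw [hM2getK, PySem.Dict.get?_insert]
    by_cases hxk : x = keep
    · rw [if_pos hxk, if_pos hxk]
    · rw [if_neg hxk, if_neg hxk, dict_get?_erase]
      by_cases hxv : x = victim
      · rw [if_pos hxv, if_pos hxv]
      · rw [if_neg hxv, if_neg hxv, PySem.Dict.get?_insert, if_neg hxk]
  have hnv : ∀ d : Cell, ¬ ((mergeB (L, M) c keep victim).1.get? d = some victim) := by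
    intro d hd
    rw [hL' d] at hd
    by_cases hdc : d = c
    · rw [if_pos hdc] at hd
      exact hkv (Option.some.inj hd)
    · rw [if_neg hdc] at hd
      by_cases hdv : L.get? d = some victim
      · rw [if_pos hdv] at hd
        exact hkv (Option.some.inj hd)
      · rw [if_neg hdv] at hd
        exact hdv hd
  have hauxK : ∀ b', GoodC m b' → b' ∈ P → (L.get? b' = some keep ↔ ConP m P uK b') := by
    intro b' hgb' hb'P
    rw [← huKk]
    exact Iff.trans eq_comm (hclasses uK b' huK.2.1 huK.2.2 hgb' hb'P)
  have hauxV : ∀ b', GoodC m b' → b' ∈ P → (L.get? b' = some victim ↔ ConP m P uV b') := by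
    intro b' hgb' hb'P
    rw [← huVk]
    exact Iff.trans eq_comm (hclasses uV b' huV.2.1 huV.2.2 hgb' hb'P)
  have hL'spec : ∀ x : Cell, x ≠ c →
      ((mergeB (L, M) c keep victim).1.get? x = some keep ↔
        (L.get? x = some keep ∨ L.get? x = some victim)) := by
    intro x hxc
    rw [hL' x, if_neg hxc]
    by_cases hxv : L.get? x = some victim
    · rw [if_pos hxv]
      exact iff_of_true rfl (Or.inr hxv)
    · rw [if_neg hxv]
      constructor
      · intro h'
        exact Or.inl h'
      · rintro (h' | h')
        · exact h'
        · exact absurd h' hxv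
  have hc' : (mergeB (L, M) c keep victim).1.get? c = some keep := by
    rw [hL' c, if_pos rfl]
  refine ⟨?_, ?_, ?_, ?_, ?_⟩
  · -- some_iff
    intro x
    rw [hL' x]
    by_cases hxc : x = c
    · rw [if_pos hxc, hxc]
      exact iff_of_true rfl ⟨hgc, List.mem_append.2 (Or.inr List.mem_cons_self)⟩
    · rw [if_neg hxc]
      by_cases hxv : L.get? x = some victim
      · rw [if_pos hxv]
        have hx := (hsome x).1 (by rw [hxv]; rfl)
        exact iff_of_true rfl ⟨hx.1, List.mem_append.2 (Or.inl hx.2)⟩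
      · rw [if_neg hxv, hsome x]
        constructor
        · rintro ⟨hg, hP⟩
          exact ⟨hg, List.mem_append.2 (Or.inl hP)⟩
        · rintro ⟨hg, hP'⟩
          exact ⟨hg, memP_snoc hP' hxc⟩
  · -- classes
    intro a b hga haP' hgb hbP'
    by_cases hac : a = c <;> by_cases hbc : b = c
    · rw [hac, hbc, hc']
      exact iff_of_true rfl Relation.ReflTransGen.refl
    · have hbP : b ∈ P := memP_snoc hbP' hbc
      rw [hac, hc', eq_comm, hL'spec b hbc]
      constructor
      · rintro (h' | h')
        · exact conP_snoc_from_c hgc huK ((hauxK b hgb hbP).1 h')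
        · exact conP_snoc_from_c hgc huV ((hauxV b hgb hbP).1 h')
      · intro hcon
        rcases (conP_snoc_fwd hcon).1 rfl with hbceq | ⟨v, hv, hvb⟩
        · exact absurd hbceq hbc
        · rcases hNbLab v hv with hvk | hvk
          · refine Or.inl ((hauxK b hgb hbP).2 ?_)
            exact Relation.ReflTransGen.trans ((hauxK v hv.2.1 hv.2.2).1 hvk) hvb
          · refine Or.inr ((hauxV b hgb hbP).2 ?_)
            exact Relation.ReflTransGen.trans ((hauxV v hv.2.1 hv.2.2).1 hvk) hvb
    · have haP : a ∈ P := memP_snoc haP' hac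
      rw [hbc, hc', hL'spec a hac]
      constructor
      · rintro (h' | h')
        · exact conP_symm (conP_snoc_from_c hgc huK ((hauxK a hga haP).1 h'))
        · exact conP_symm (conP_snoc_from_c hgc huV ((hauxV a hga haP).1 h'))
      · intro hcon
        rcases (conP_snoc_fwd (conP_symm hcon)).1 rfl with haceq | ⟨v, hv, hva⟩
        · exact absurd haceq hac
        · rcases hNbLab v hv with hvk | hvk
          · refine Or.inl ((hauxK a hga haP).2 ?_)
            exact Relation.ReflTransGen.trans ((hauxK v hv.2.1 hv.2.2).1 hvk) hva
          · refine Or.inr ((hauxV a hga haP).2 ?_)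
            exact Relation.ReflTransGen.trans ((hauxV v hv.2.1 hv.2.2).1 hvk) hva
    · have haP : a ∈ P := memP_snoc haP' hac
      have hbP : b ∈ P := memP_snoc hbP' hbc
      by_cases hsa : L.get? a = some keep ∨ L.get? a = some victim
        <;> by_cases hsb : L.get? b = some keep ∨ L.get? b = some victim
      · have hLa : (mergeB (L, M) c keep victim).1.get? a = some keep := (hL'spec a hac).2 hsa
        have hLb : (mergeB (L, M) c keep victim).1.get? b = some keep := (hL'spec b hbc).2 hsb
        rw [hLa, hLb]
        refine iff_of_true rfl ?_
        have h1 : ConP m P uK a ∨ ConP m P uV a := by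
          rcases hsa with h' | h'
          · exact Or.inl ((hauxK a hga haP).1 h')
          · exact Or.inr ((hauxV a hga haP).1 h')
        have h2 : ConP m P uK b ∨ ConP m P uV b := by
          rcases hsb with h' | h'
          · exact Or.inl ((hauxK b hgb hbP).1 h')
          · exact Or.inr ((hauxV b hgb hbP).1 h')
        rcases h1 with h1 | h1 <;> rcases h2 with h2 | h2
        · exact conP_snoc_via hgc huK huK (conP_symm h1) h2
        · exact conP_snoc_via hgc huK huV (conP_symm h1) h2
        · exact conP_snoc_via hgc huV huK (conP_symm h1) h2
        · exact conP_snoc_via hgc huV huV (conP_symm h1) h2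
      · have hLa : (mergeB (L, M) c keep victim).1.get? a = some keep := (hL'spec a hac).2 hsa
        refine iff_of_false ?_ ?_
        · intro h'
          exact hsb ((hL'spec b hbc).1 (by rw [← h']; exact hLa))
        · intro hcon
          rcases (conP_snoc_fwd hcon).2 hac with ⟨_, h2⟩
          rcases h2 hbc with hcon' | ⟨u, v, hu, hv, hau, hvb⟩
          · have heq := (hclasses a b hga haP hgb hbP).2 hcon'
            rw [heq] at hsa
            exact hsb hsa
          · have hvb' : L.get? v = L.get? b := (hclasses v b hv.2.1 hv.2.2 hgb hbP).2 hvb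
            rcases hNbLab v hv with hvk | hvk
            · exact hsb (Or.inl (by rw [← hvb']; exact hvk))
            · exact hsb (Or.inr (by rw [← hvb']; exact hvk))
      · have hLb : (mergeB (L, M) c keep victim).1.get? b = some keep := (hL'spec b hbc).2 hsb
        refine iff_of_false ?_ ?_
        · intro h'
          exact hsa ((hL'spec a hac).1 (by rw [h']; exact hLb))
        · intro hcon
          rcases (conP_snoc_fwd (conP_symm hcon)).2 hbc with ⟨_, h2⟩
          rcases h2 hac with hcon' | ⟨u, v, hu, hv, hbu, hva⟩
          · have heq := (hclasses b a hgb hbP hga haP).2 hcon'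
            rw [heq] at hsb
            exact hsa hsb
          · have hva' : L.get? v = L.get? a := (hclasses v a hv.2.1 hv.2.2 hga haP).2 hva
            rcases hNbLab v hv with hvk | hvk
            · exact hsa (Or.inl (by rw [← hva']; exact hvk))
            · exact hsa (Or.inr (by rw [← hva']; exact hvk))
      · have hLa : (mergeB (L, M) c keep victim).1.get? a = L.get? a := by
          rw [hL' a, if_neg hac, if_neg (fun h' => hsa (Or.inr h'))]
        have hLb : (mergeB (L, M) c keep victim).1.get? b = L.get? b := by
          rw [hL' b, if_neg hbc, if_neg (fun h' => hsb (Or.inr h'))]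
        rw [hLa, hLb, hclasses a b hga haP hgb hbP]
        constructor
        · exact conP_mono (fun x hx => List.mem_append.2 (Or.inl hx))
        · intro hcon
          rcases (conP_snoc_fwd hcon).2 hac with ⟨_, h2⟩
          rcases h2 hbc with hcon' | ⟨u, v, hu, hv, hau, hvb⟩
          · exact hcon'
          · exfalso
            have hau' : L.get? a = L.get? u := (hclasses a u hga haP hu.2.1 hu.2.2).2 hau
            rcases hNbLab u hu with huk | huk
            · exact hsa (Or.inl (by rw [hau']; exact huk))
            · exact hsa (Or.inr (by rw [hau']; exact huk))
  · -- rep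
    intro d v hd
    have hvnv : v ≠ victim := by
      intro h'
      rw [h'] at hd
      exact hnv d hd
    rw [hL' d] at hd
    by_cases hdc : d = c
    · rw [if_pos hdc] at hd
      have hv : v = keep := (Option.some.inj hd).symm
      rw [hv, hL' keep, if_neg hkeepc, if_neg hknv]
      exact hLkeep
    · rw [if_neg hdc] at hd
      by_cases hdv : L.get? d = some victim
      · rw [if_pos hdv] at hd
        have hv : v = keep := (Option.some.inj hd).symm
        rw [hv, hL' keep, if_neg hkeepc, if_neg hknv]
        exact hLkeep
      · rw [if_neg hdv] at hd
        have hvc : v ≠ c := hval_ne_c d v hd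
        have hLv : L.get? v = some v := hrep d v hd
        have hvnv' : ¬ (L.get? v = some victim) := by
          intro h'
          rw [hLv] at h'
          exact hvnv (Option.some.inj h')
        rw [hL' v, if_neg hvc, if_neg hvnv']
        exact hLv
  · -- memSome
    intro lab
    rw [hM3 lab]
    by_cases hlk : lab = keep
    · rw [if_pos hlk]
      refine iff_of_true rfl ⟨c, ?_⟩
      rw [hc', hlk]
    · rw [if_neg hlk]
      by_cases hlv : lab = victim
      · rw [if_pos hlv]
        refine iff_of_false (by simp) ?_
        rintro ⟨d, hd⟩
        rw [hlv] at hd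
        exact hnv d hd
      · rw [if_neg hlv, hmemSome lab]
        constructor
        · rintro ⟨d, hd⟩
          have hdc : d ≠ c := by
            intro h'
            rw [h', hNone_c] at hd
            cases hd
          have hdv : ¬ (L.get? d = some victim) := by
            intro h'
            rw [hd] at h'
            exact hlv (Option.some.inj h')
          exact ⟨d, by rw [hL' d, if_neg hdc, if_neg hdv]; exact hd⟩
        · rintro ⟨d, hd⟩
          rw [hL' d] at hd
          by_cases hdc : d = c
          · rw [if_pos hdc] at hd
            exact absurd (Option.some.inj hd).symm hlk
          · rw [if_neg hdc] at hd
            by_cases hdv : L.get? d = some victim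
            · rw [if_pos hdv] at hd
              exact absurd (Option.some.inj hd).symm hlk
            · rw [if_neg hdv] at hd
              exact ⟨d, hd⟩
  · -- memExact
    intro lab lst hlst
    rw [hM3 lab] at hlst
    by_cases hlk : lab = keep
    · rw [if_pos hlk] at hlst
      obtain rfl := Option.some.inj hlst
      intro d
      rw [hlk]
      constructor
      · intro hd
        rcases List.mem_append.1 hd with hd' | hd'
        · rcases List.mem_append.1 hd' with hd'' | hd''
          · have hdk := (hExK d).1 hd''
            have hdc : d ≠ c := by
              intro h'
              rw [h', hNone_c] at hdk
              cases hdk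
            have hdv : ¬ (L.get? d = some victim) := by
              intro h'
              rw [hdk] at h'
              exact hkv (Option.some.inj h')
            rw [hL' d, if_neg hdc, if_neg hdv]
            exact hdk
          · have hdv := (hExV d).1 hd''
            have hdc : d ≠ c := by
              intro h'
              rw [h', hNone_c] at hdv
              cases hdv
            rw [hL' d, if_neg hdc, if_pos hdv]
        · rcases List.mem_cons.1 hd' with rfl | h''
          · rw [hL' d, if_pos rfl]
          · cases h''
      · intro hd
        rw [hL' d] at hd
        by_cases hdc : d = c
        · rw [hdc]
          exact List.mem_append.2 (Or.inr List.mem_cons_self)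
        · rw [if_neg hdc] at hd
          by_cases hdv : L.get? d = some victim
          · exact List.mem_append.2 (Or.inl (List.mem_append.2 (Or.inr ((hExV d).2 hdv))))
          · rw [if_neg hdv] at hd
            exact List.mem_append.2 (Or.inl (List.mem_append.2 (Or.inl ((hExK d).2 hd))))
    · rw [if_neg hlk] at hlst
      by_cases hlv : lab = victim
      · rw [if_pos hlv] at hlst
        cases hlst
      · rw [if_neg hlv] at hlst
        have hEx2 := hmemExact lab lst hlst
        intro d
        rw [hL' d]
        by_cases hdc : d = c
        · rw [if_pos hdc, hdc]
          refine iff_of_false ?_ ?_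
          · intro h'
            have h2 := (hEx2 c).1 h'
            rw [hNone_c] at h2
            cases h2
          · intro h'
            exact hlk (Option.some.inj h').symm
        · rw [if_neg hdc]
          by_cases hdv : L.get? d = some victim
          · rw [if_pos hdv]
            refine iff_of_false ?_ ?_
            · intro h'
              have h2 := (hEx2 d).1 h'
              rw [hdv] at h2
              exact hlv (Option.some.inj h2).symm
            · intro h'
              exact hlk (Option.some.inj h').symm
          · rw [if_neg hdv]
            exact hEx2 d

lemma invB_step {m : List (List Int)} {P S : List Cell} {c : Cell}
    (hsplit : gridCells m = P ++ c :: S)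
    {L : PySem.Dict Cell Cell} {M : PySem.Dict Cell (List Cell)}
    (h : InvB m P L M) :
    InvB m (P ++ [c]) (stepB m L M c.1 c.2).1 (stepB m L M c.1 c.2).2 := by
  have hcscan : c ∈ gridCells m := by
    rw [hsplit]; exact List.mem_append.2 (Or.inr List.mem_cons_self)
  have hcInb : Inb m c := mem_gridCells.1 hcscan
  by_cases hgood : mcell m c.1 c.2 = 0
  · have hgc : GoodC m c := ⟨hcInb, hgood⟩
    have hnbchar : ∀ u, NbP m P c u ↔
        ((u = (c.1 - 1, c.2) ∧ (L.get? (c.1 - 1, c.2)).isSome) ∨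
         (u = (c.1, c.2 - 1) ∧ (L.get? (c.1, c.2 - 1)).isSome)) := by
      intro u
      constructor
      · rintro ⟨hun, hug, huP⟩
        have hInb : Inb m u := hug.1
        have hS : (L.get? u).isSome := (h.some_iff u).2 ⟨hug, huP⟩
        rcases (nbr_prefix_iff hsplit hun hInb).1 huP with h' | h'
        · exact Or.inl ⟨h', h' ▸ hS⟩
        · exact Or.inr ⟨h', h' ▸ hS⟩
      · rintro (⟨rfl, hS⟩ | ⟨rfl, hS⟩)
        · obtain ⟨hg, hP⟩ := (h.some_iff _).1 hS
          exact ⟨by simp [nbrsOf], hg, hP⟩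
        · obtain ⟨hg, hP⟩ := (h.some_iff _).1 hS
          exact ⟨by simp [nbrsOf], hg, hP⟩
    unfold stepB
    rw [if_neg (fun hne => hne hgood)]
    rcases hu : L.get? (c.1 - 1, c.2) with _ | ku <;> rcases hl : L.get? (c.1, c.2 - 1) with _ | kl
    · -- fresh class
      have hnb : ∀ u, ¬ NbP m P c u := by
        intro u hn
        rcases (hnbchar u).1 hn with ⟨_, hS⟩ | ⟨_, hS⟩
        · rw [hu] at hS; cases hS
        · rw [hl] at hS; cases hS
      exact invB_fresh hsplit hgc h hnb
    · -- only the left neighbour is labelled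
      refine invB_attach hsplit hgc h (k := kl) ?_ ?_
      · intro u hn
        rcases (hnbchar u).1 hn with ⟨rfl, hS⟩ | ⟨rfl, _⟩
        · rw [hu] at hS; cases hS
        · exact hl
      · refine ⟨(c.1, c.2 - 1), (hnbchar _).2 (Or.inr ⟨rfl, by rw [hl]; rfl⟩), hl⟩
    · -- only the up neighbour is labelled
      refine invB_attach hsplit hgc h (k := ku) ?_ ?_
      · intro u hn
        rcases (hnbchar u).1 hn with ⟨rfl, _⟩ | ⟨rfl, hS⟩
        · exact hu
        · rw [hl] at hS; cases hS
      · refine ⟨(c.1 - 1, c.2), (hnbchar _).2 (Or.inl ⟨rfl, by rw [hu]; rfl⟩), hu⟩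
    · -- both neighbours labelled
      show InvB m (P ++ [c])
        (if ku = kl then attachB (L, M) (c.1, c.2) ku
         else if (M.getD ku []).length < (M.getD kl []).length then mergeB (L, M) (c.1, c.2) kl ku
         else mergeB (L, M) (c.1, c.2) ku kl).1
        (if ku = kl then attachB (L, M) (c.1, c.2) ku
         else if (M.getD ku []).length < (M.getD kl []).length then mergeB (L, M) (c.1, c.2) kl ku
         else mergeB (L, M) (c.1, c.2) ku kl).2
      by_cases hkl : ku = kl
      · rw [if_pos hkl]
        refine invB_attach hsplit hgc h (k := ku) ?_ ?_
        · intro u hn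
          rcases (hnbchar u).1 hn with ⟨rfl, _⟩ | ⟨rfl, _⟩
          · exact hu
          · rw [hl, hkl]
        · refine ⟨(c.1 - 1, c.2), (hnbchar _).2 (Or.inl ⟨rfl, by rw [hu]; rfl⟩), hu⟩
      · rw [if_neg hkl]
        have hNbLab : ∀ u, NbP m P c u → L.get? u = some ku ∨ L.get? u = some kl := by
          intro u hn
          rcases (hnbchar u).1 hn with ⟨rfl, _⟩ | ⟨rfl, _⟩
          · exact Or.inl hu
          · exact Or.inr hl
        have hexU : ∃ u, NbP m P c u ∧ L.get? u = some ku :=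
          ⟨(c.1 - 1, c.2), (hnbchar _).2 (Or.inl ⟨rfl, by rw [hu]; rfl⟩), hu⟩
        have hexL : ∃ u, NbP m P c u ∧ L.get? u = some kl :=
          ⟨(c.1, c.2 - 1), (hnbchar _).2 (Or.inr ⟨rfl, by rw [hl]; rfl⟩), hl⟩
        by_cases hlen : (M.getD ku []).length < (M.getD kl []).length
        · rw [if_pos hlen]
          exact invB_merge hsplit hgc h (fun h' => hkl h'.symm) hexL hexU
            (fun u hn => (hNbLab u hn).symm)
        · rw [if_neg hlen]
          exact invB_merge hsplit hgc h hkl hexU hexL hNbLab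
  · -- not a gap: state unchanged
    have hng : ¬ GoodC m c := fun hg => hgood hg.2
    obtain ⟨hsome, hclasses, hrep, hmemSome, hmemExact⟩ := h
    unfold stepB
    rw [if_pos hgood]
    refine ⟨?_, ?_, hrep, hmemSome, hmemExact⟩
    · intro x
      rw [hsome x]
      constructor
      · rintro ⟨hg, hP⟩
        exact ⟨hg, List.mem_append.2 (Or.inl hP)⟩
      · rintro ⟨hg, hP'⟩
        refine ⟨hg, memP_snoc hP' ?_⟩
        intro h'
        exact hng (h' ▸ hg)
    · intro a b hga haP' hgb hbP'
      have hac : a ≠ c := fun h' => hng (h' ▸ hga)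
      have hbc : b ≠ c := fun h' => hng (h' ▸ hgb)
      rw [conP_snoc_not_good hng]
      exact hclasses a b hga (memP_snoc haP' hac) hgb (memP_snoc hbP' hbc)

lemma invB_fold {m : List (List Int)} :
    ∀ (S P : List Cell) (L : PySem.Dict Cell Cell) (M : PySem.Dict Cell (List Cell)),
      gridCells m = P ++ S → InvB m P L M →
      InvB m (gridCells m) (S.foldl (fun st c => stepB m st.1 st.2 c.1 c.2) (L, M)).1
        (S.foldl (fun st c => stepB m st.1 st.2 c.1 c.2) (L, M)).2 := by
  intro S
  induction S with
  | nil =>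
    intro P L M hsplit h
    rw [List.append_nil] at hsplit
    simp only [List.foldl_nil]
    rw [hsplit]
    exact h
  | cons c S' ih =>
    intro P L M hsplit h
    have hstep := invB_step (S := S') hsplit h
    have hsplit' : gridCells m = (P ++ [c]) ++ S' := by
      rw [hsplit, List.append_assoc]; rfl
    have h2 := ih (P ++ [c]) (stepB m L M c.1 c.2).1 (stepB m L M c.1 c.2).2 hsplit' hstep
    simp only [List.foldl_cons]
    exact h2

-- ---------- InvA: A's sweep against the final labels ----------

-- A-side helper lemmas (visited-matrix shape and closure of reachable marked sets)
lemma rect_vset {m : List (List Int)} {v : List (List Bool)} {x y : Int} (h : RectV m v) :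
    RectV m (vset v x y) := by
  constructor
  · simpa [vset] using h.1
  · intro row hrow
    obtain ⟨k, hk⟩ := List.getElem?_of_mem hrow
    rw [vset, List.getElem?_modify] at hk
    rcases h' : v[k]? with _ | r
    · rw [h'] at hk; cases hk
    · rw [h'] at hk
      simp only [Option.map_eq_map, Option.map_some, Option.some.injEq] at hk
      have hrm : r ∈ v := List.mem_of_getElem? h'
      by_cases hxk : x.toNat = k
      · rw [← hk]
        simp [hxk, List.length_set, h.2 r hrm]
      · rw [← hk]
        simp [hxk, h.2 r hrm]

lemma rect_index {m : List (List Int)} {v : List (List Bool)} {x y : Int} (h : RectV m v)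
    (hx : 0 ≤ x) (hxm : x < (m.length : Int)) (hy : 0 ≤ y) (hym : y < ((m.headD []).length : Int)) :
    x.toNat < v.length ∧ y.toNat < (v.getD x.toNat []).length := by
  have hlen : x.toNat < v.length := by
    have := h.1
    omega
  refine ⟨hlen, ?_⟩
  have hmem : v.getD x.toNat [] ∈ v := by
    rw [List.getD_eq_getElem?_getD, List.getElem?_eq_getElem hlen]
    exact List.getElem_mem hlen
  rw [h.2 _ hmem]
  omega

lemma mem_push_iff {x y : Int} {rest : List Cell} {t : Cell} :
    t ∈ (x, y + 1) :: (x, y - 1) :: (x + 1, y) :: (x - 1, y) :: rest ↔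
      t ∈ nbrsOf (x, y) ∨ t ∈ rest := by
  simp [nbrsOf]; tauto

-- a closed marked set absorbs everything reachable from a marked good cell
lemma rch_closed {m : List (List Int)} {w : Cell → Prop}
    (hcl : ∀ a b, w a → GoodC m a → b ∈ nbrsOf a → GoodC m b → w b)
    {s c : Cell} (hg : GoodC m s) (hw : w s) (h : Rch m s c) : w c := by
  suffices h' : w c ∧ GoodC m c from h'.1
  induction h with
  | refl => exact ⟨hw, hg⟩
  | tail hsb hstep ih => exact ⟨hcl _ _ ih.1 ih.2 hstep.1 hstep.2, hstep.2⟩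

-- invariants of A's search, by one functional induction
lemma dfsA_main (m : List (List Int)) (v : List (List Bool)) (S : List Cell) (count : Int) :
    RectV m v →
    RectV m (dfsA m v S count).1 ∧
    (∀ a b : Int, 0 ≤ a → 0 ≤ b → vget v a b = true → vget (dfsA m v S count).1 a b = true) ∧
    (∀ c : Cell, Inb m c → vget (dfsA m v S count).1 c.1 c.2 = true →
       vget v c.1 c.2 = true ∨ ∃ t ∈ S, GoodC m t ∧ Rch m t c) ∧
    ((dfsA m v S count).2 + (unvisA m (dfsA m v S count).1 : Int) = count + (unvisA m v : Int)) ∧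
    (∀ t ∈ S, GoodC m t → vget (dfsA m v S count).1 t.1 t.2 = true) ∧
    ((∀ a b, vget v a.1 a.2 = true → GoodC m a → b ∈ nbrsOf a → GoodC m b →
        vget v b.1 b.2 = true ∨ b ∈ S) →
      ∀ a b : Cell, vget (dfsA m v S count).1 a.1 a.2 = true → GoodC m a → b ∈ nbrsOf a → GoodC m b →
        vget (dfsA m v S count).1 b.1 b.2 = true) := by
  fun_induction dfsA m v S count with
  | case1 v count =>
    intro hrect
    exact ⟨hrect, fun a b _ _ h => h, fun c _ h => Or.inl h, by simp,
      fun t ht => absurd ht List.not_mem_nil,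
      fun hcl a b ha hga hb hgb =>
        (hcl a b ha hga hb hgb).elim id (fun hbs => absurd hbs List.not_mem_nil)⟩
  | case2 v count x y rest hbad ih =>
    intro hrect
    obtain ⟨iR, iM, iS, iN, iC0, iCl⟩ := ih hrect
    refine ⟨iR, iM, ?_, iN, ?_, ?_⟩
    · intro c hic hvc
      rcases iS c hic hvc with h | ⟨t, ht, hgt, hrt⟩
      · exact Or.inl h
      · exact Or.inr ⟨t, List.mem_cons_of_mem _ ht, hgt, hrt⟩
    · intro t ht hgt
      rcases List.mem_cons.1 ht with rfl | ht'
      · have g : 0 ≤ x ∧ x < (m.length : Int) ∧ 0 ≤ y ∧ y < ((m.headD []).length : Int) ∧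
            mcell m x y = 0 := by
          obtain ⟨⟨g1, g2, g3, g4⟩, g5⟩ := hgt
          exact ⟨g1, g2, g3, g4, g5⟩
        rcases hbad with h | h | h | h | h | h
        · omega
        · omega
        · omega
        · omega
        · simpa using iM x y g.1 g.2.2.1 h
        · exact absurd g.2.2.2.2 h
      · exact iC0 t ht' hgt
    · intro hcl
      refine iCl ?_
      intro a b hva hga hbn hgb
      rcases hcl a b hva hga hbn hgb with h | hmem
      · exact Or.inl h
      · rcases List.mem_cons.1 hmem with rfl | h'
        · have g : 0 ≤ x ∧ x < (m.length : Int) ∧ 0 ≤ y ∧ y < ((m.headD []).length : Int) ∧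
              mcell m x y = 0 := by
            obtain ⟨⟨g1, g2, g3, g4⟩, g5⟩ := hgb
            exact ⟨g1, g2, g3, g4, g5⟩
          rcases hbad with h | h | h | h | h | h
          · omega
          · omega
          · omega
          · omega
          · exact Or.inl (by simpa using h)
          · exact absurd g.2.2.2.2 h
        · exact Or.inr h'
  | case3 v count x y rest hbad hr ih =>
    intro hrect
    have hf := hbad
    push Not at hf
    obtain ⟨h1, h2, h3, h4, h5, h6⟩ := hf
    have hvf : vget v x y = false := by simpa using h5
    have hgood : GoodC m (x, y) := ⟨⟨h1, h2, h3, h4⟩, h6⟩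
    obtain ⟨iR, iM, iS, iN, iC0, iCl⟩ := ih (rect_vset hrect)
    have hchar : ∀ a b : Int, 0 ≤ a → 0 ≤ b →
        vget (vset v x y) a b = if a = x ∧ b = y then true else vget v a b :=
      fun a b ha hb => vget_vset h1 h3 hr.1 hr.2 ha hb
    refine ⟨iR, ?_, ?_, ?_, ?_, ?_⟩
    · intro a b ha hb hv
      refine iM a b ha hb ?_
      rw [hchar a b ha hb]
      split_ifs
      · rfl
      · exact hv
    · intro c hic hvc
      rcases iS c hic hvc with hv1 | ⟨t, ht, hgt, hrt⟩
      · rw [hchar c.1 c.2 hic.1 hic.2.2.1] at hv1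
        by_cases hcx : c.1 = x ∧ c.2 = y
        · refine Or.inr ⟨(x, y), List.mem_cons_self, hgood, ?_⟩
          have hc : c = (x, y) := Prod.ext hcx.1 hcx.2
          rw [hc]
          exact Relation.ReflTransGen.refl
        · rw [if_neg hcx] at hv1
          exact Or.inl hv1
      · rcases mem_push_iff.1 ht with hn | hr'
        · exact Or.inr ⟨(x, y), List.mem_cons_self, hgood,
            Relation.ReflTransGen.head ⟨hn, hgt⟩ hrt⟩
        · exact Or.inr ⟨t, List.mem_cons_of_mem _ hr', hgt, hrt⟩
    · have hvv : unvisA m (vset v x y) + 1 = unvisA m v :=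
        unvisA_vset h1 h2 h3 h4 hr.1 hr.2 hvf
      omega
    · intro t ht hgt
      rcases List.mem_cons.1 ht with rfl | ht'
      · have hv1 : vget (vset v x y) x y = true := by
          rw [hchar x y h1 h3]; simp
        simpa using iM x y h1 h3 hv1
      · exact iC0 t (mem_push_iff.2 (Or.inr ht')) hgt
    · intro hcl a b hva hga hbn hgb
      refine iCl ?_ a b hva hga hbn hgb
      intro a' b' hva' hga' hbn' hgb'
      rw [hchar a'.1 a'.2 hga'.1.1 hga'.1.2.2.1] at hva'
      by_cases hax : a'.1 = x ∧ a'.2 = y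
      · have ha' : a' = (x, y) := Prod.ext hax.1 hax.2
        exact Or.inr (mem_push_iff.2 (Or.inl (ha' ▸ hbn')))
      · rw [if_neg hax] at hva'
        rcases hcl a' b' hva' hga' hbn' hgb' with hvb | hmem
        · left
          rw [hchar b'.1 b'.2 hgb'.1.1 hgb'.1.2.2.1]
          split_ifs
          · rfl
          · exact hvb
        · rcases List.mem_cons.1 hmem with rfl | h'
          · left
            show vget (vset v x y) x y = true
            rw [hchar x y h1 h3]
            simp
          · exact Or.inr (mem_push_iff.2 (Or.inr h'))
  | case4 v count x y rest hbad hr =>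
    intro hrect
    exfalso
    have hf := hbad
    push Not at hf
    obtain ⟨h1, h2, h3, h4, _, _⟩ := hf
    exact hr (rect_index hrect h1 h2 h3 h4)

lemma vget_init {R C : Nat} {a b : Int} (ha : 0 ≤ a) (hb : 0 ≤ b) :
    vget (List.replicate R (List.replicate C false)) a b = false := by
  rw [vget_toNat _ ha hb]
  have h1 : (List.replicate R (List.replicate C false)).getD a.toNat [] = [] ∨
      (List.replicate R (List.replicate C false)).getD a.toNat [] = List.replicate C false := by
    rw [List.getD_eq_getElem?_getD, List.getElem?_replicate]
    split
    · exact Or.inr rfl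
    · exact Or.inl rfl
  rcases h1 with h1 | h1 <;> rw [h1]
  · rfl
  · rw [List.getD_eq_getElem?_getD, List.getElem?_replicate]
    split
    · rfl
    · rfl

lemma stepA_neg {m : List (List Int)} {st : List (List Bool) × List Int} {i j : Int}
    (h : ¬ (mcell m i j = 0 ∧ vget st.1 i j = false)) : stepA m st i j = st := by
  unfold stepA
  rw [if_neg h]

lemma stepA_pos {m : List (List Int)} {st : List (List Bool) × List Int} {i j : Int}
    (h : mcell m i j = 0 ∧ vget st.1 i j = false) :
    stepA m st i j = ((dfsA m st.1 [(i, j)] 0).1,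
      if 0 < (dfsA m st.1 [(i, j)] 0).2 then st.2 ++ [(dfsA m st.1 [(i, j)] 0).2] else st.2) := by
  unfold stepA
  rw [if_pos h]

lemma invA_step {m : List (List Int)} {lbl : PySem.Dict Cell Cell}
    (Hsome : ∀ x : Cell, (lbl.get? x).isSome ↔ GoodC m x)
    (Hiff : ∀ a b : Cell, GoodC m a → GoodC m b → (lbl.get? a = lbl.get? b ↔ Rch m a b))
    {P S : List Cell} {c : Cell} (hsplit : gridCells m = P ++ c :: S)
    {st : List (List Bool) × List Int} (h : InvA m lbl P st) :
    InvA m lbl (P ++ [c]) (stepA m st c.1 c.2) := by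
  obtain ⟨hrect, hvis, hout⟩ := h
  have hcscan : c ∈ gridCells m := by
    rw [hsplit]; exact List.mem_append.2 (Or.inr List.mem_cons_self)
  have hcInb : Inb m c := mem_gridCells.1 hcscan
  by_cases hgood : mcell m c.1 c.2 = 0
  · have hgc : GoodC m c := ⟨hcInb, hgood⟩
    have hlabS : (lbl.get? c).isSome := (Hsome c).2 hgc
    obtain ⟨labc, hlabc⟩ := Option.isSome_iff_exists.1 hlabS
    by_cases hv : vget st.1 c.1 c.2 = true
    · -- already visited: stepA does nothing, the label of c was discovered earlier
      rw [stepA_neg (by rintro ⟨_, hf⟩; rw [hv] at hf; cases hf)]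
      obtain ⟨e0, he0P, hge0, hre0⟩ := (hvis c hcInb).1 hv
      refine ⟨hrect, ?_, ?_⟩
      · intro d hInb
        rw [hvis d hInb]
        constructor
        · rintro ⟨e, heP, hge, hr⟩
          exact ⟨e, List.mem_append.2 (Or.inl heP), hge, hr⟩
        · rintro ⟨e, heP', hge, hr⟩
          rcases List.mem_append.1 heP' with h' | h'
          · exact ⟨e, h', hge, hr⟩
          · rcases List.mem_cons.1 h' with rfl | h''
            · exact ⟨e0, he0P, hge0, Relation.ReflTransGen.trans hre0 hr⟩
            · cases h''
      · have hmem : labc ∈ labOrder lbl P := by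
          refine mem_labOrder.2 ⟨e0, he0P, ?_⟩
          have he : lbl.get? e0 = lbl.get? c := (Hiff e0 c hge0 hgc).2 hre0
          rw [he, hlabc]
        rw [hout, labOrder_append_some hlabc, if_pos hmem]
    · -- a new component is flooded
      have hv' : vget st.1 c.1 c.2 = false := by
        cases hvv : vget st.1 c.1 c.2
        · rfl
        · exact absurd hvv hv
      rw [stepA_pos ⟨hgood, hv'⟩]
      obtain ⟨iR, iM, iS, iN, iC0, iCl⟩ := dfsA_main m st.1 [(c.1, c.2)] 0 hrect
      have hclosed_old : ∀ a b : Cell, vget st.1 a.1 a.2 = true → GoodC m a → b ∈ nbrsOf a →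
          GoodC m b → vget st.1 b.1 b.2 = true ∨ b ∈ [((c.1 : Int), (c.2 : Int))] := by
        intro a b hva hga hbn hgb
        obtain ⟨e, heP, hge, hre⟩ := (hvis a hga.1).1 hva
        exact Or.inl ((hvis b hgb.1).2 ⟨e, heP, hge, Relation.ReflTransGen.tail hre ⟨hbn, hgb⟩⟩)
      have hCl := iCl hclosed_old
      have hmarked : vget (dfsA m st.1 [(c.1, c.2)] 0).1 c.1 c.2 = true :=
        iC0 (c.1, c.2) List.mem_cons_self hgc
      have hchar : ∀ d : Cell, Inb m d →
          (vget (dfsA m st.1 [(c.1, c.2)] 0).1 d.1 d.2 = true ↔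
            vget st.1 d.1 d.2 = true ∨ Rch m c d) := by
        intro d hInb
        constructor
        · intro hvd
          rcases iS d hInb hvd with h' | ⟨t, ht, hgt, hrt⟩
          · exact Or.inl h'
          · rcases List.mem_cons.1 ht with rfl | h''
            · exact Or.inr hrt
            · cases h''
        · rintro (h' | h')
          · exact iM d.1 d.2 hInb.1 hInb.2.2.1 h'
          · exact rch_closed hCl hgc hmarked h'
      have hnotold : ∀ d : Cell, Inb m d → lbl.get? d = some labc → vget st.1 d.1 d.2 = false := by
        intro d hInb hld
        cases hvv : vget st.1 d.1 d.2
        · rfl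
        · exfalso
          have hgd : GoodC m d := (Hsome d).1 (by rw [hld]; rfl)
          obtain ⟨e, heP, hge, hre⟩ := (hvis d hInb).1 hvv
          have he1 : lbl.get? e = lbl.get? d := (Hiff e d hge hgd).2 hre
          have he2 : lbl.get? e = lbl.get? c := by rw [he1, hld, hlabc]
          have hrec : Rch m e c := (Hiff e c hge hgc).1 he2
          exact hv ((hvis c hcInb).2 ⟨e, heP, hge, hrec⟩)
      have hcntnew : ((gridCells m).countP (fun d : Cell =>
            vget (dfsA m st.1 [(c.1, c.2)] 0).1 d.1 d.2 && !vget st.1 d.1 d.2))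
          = (gridCells m).countP (fun d => lbl.get? d == some labc) := by
        refine List.countP_congr ?_
        intro d hd
        have hInb := mem_gridCells.1 hd
        by_cases hld : lbl.get? d = some labc
        · have hgd : GoodC m d := (Hsome d).1 (by rw [hld]; rfl)
          have heq : lbl.get? c = lbl.get? d := by rw [hlabc, hld]
          have hrcd : Rch m c d := (Hiff c d hgc hgd).1 heq
          have hno := hnotold d hInb hld
          have hnew : vget (dfsA m st.1 [(c.1, c.2)] 0).1 d.1 d.2 = true :=
            (hchar d hInb).2 (Or.inr hrcd)
          simp [hnew, hno, hld]
        · have hrhs : (lbl.get? d == some labc) = false := by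
            simp only [beq_eq_false_iff_ne, ne_eq]
            exact hld
          rw [hrhs]
          have hnot : ¬ (vget (dfsA m st.1 [(c.1, c.2)] 0).1 d.1 d.2 = true ∧
              vget st.1 d.1 d.2 = false) := by
            rintro ⟨hh1, hh2⟩
            rcases (hchar d hInb).1 hh1 with h' | h'
            · rw [h'] at hh2; cases hh2
            · rcases rch_good_target h' with heq | hgd
              · exact hld (by rw [heq]; exact hlabc)
              · have : lbl.get? c = lbl.get? d := (Hiff c d hgc hgd).2 h'
                exact hld (by rw [← this]; exact hlabc)
          cases hh1 : vget (dfsA m st.1 [(c.1, c.2)] 0).1 d.1 d.2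
          · simp
          · cases hh2 : vget st.1 d.1 d.2
            · exact absurd ⟨hh1, hh2⟩ hnot
            · simp [hh2]
      have hcount : (dfsA m st.1 [(c.1, c.2)] 0).2
          = ((gridCells m).countP (fun d => lbl.get? d == some labc) : Int) := by
        have hq_imp : ∀ d ∈ gridCells m, (fun d : Cell => vget st.1 d.1 d.2) d = true →
            (fun d : Cell => vget (dfsA m st.1 [(c.1, c.2)] 0).1 d.1 d.2) d = true := by
          intro d hd h'
          have hInb := mem_gridCells.1 hd
          exact iM d.1 d.2 hInb.1 hInb.2.2.1 h'
        have hsub := countP_sub (gridCells m) _ _ hq_imp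
        have hN := iN
        have hsub2 : unvisA m st.1
            = unvisA m (dfsA m st.1 [(c.1, c.2)] 0).1
              + (gridCells m).countP (fun d : Cell =>
                  vget (dfsA m st.1 [(c.1, c.2)] 0).1 d.1 d.2 && !vget st.1 d.1 d.2) := hsub
        rw [← hcntnew]
        omega
      have hpos : 0 < (dfsA m st.1 [(c.1, c.2)] 0).2 := by
        rw [hcount]
        have hcp : 0 < (gridCells m).countP (fun d => lbl.get? d == some labc) := by
          refine List.countP_pos_iff.2 ⟨c, hcscan, ?_⟩
          simp [hlabc]
        exact_mod_cast hcp
      have hnotmem : labc ∉ labOrder lbl P := by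
        intro hmem
        obtain ⟨d, hdP, hd⟩ := mem_labOrder.1 hmem
        have hgd : GoodC m d := (Hsome d).1 (by rw [hd]; rfl)
        have heqd : lbl.get? d = lbl.get? c := by rw [hd, hlabc]
        have hrdc : Rch m d c := (Hiff d c hgd hgc).1 heqd
        exact hv ((hvis c hcInb).2 ⟨d, hdP, hgd, hrdc⟩)
      refine ⟨iR, ?_, ?_⟩
      · intro d hInb
        rw [hchar d hInb, hvis d hInb]
        constructor
        · rintro (⟨e, heP, hge, hr⟩ | hr)
          · exact ⟨e, List.mem_append.2 (Or.inl heP), hge, hr⟩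
          · exact ⟨c, List.mem_append.2 (Or.inr List.mem_cons_self), hgc, hr⟩
        · rintro ⟨e, heP', hge, hr⟩
          rcases List.mem_append.1 heP' with h' | h'
          · exact Or.inl ⟨e, h', hge, hr⟩
          · rcases List.mem_cons.1 h' with rfl | h''
            · exact Or.inr hr
            · cases h''
      · show (if 0 < (dfsA m st.1 [(c.1, c.2)] 0).2 then
            st.2 ++ [(dfsA m st.1 [(c.1, c.2)] 0).2] else st.2) = _
        rw [if_pos hpos, hout, hcount, labOrder_append_some hlabc, if_neg hnotmem,
          List.map_append]
        rfl
  · -- not a gap: nothing happens on either side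
    have hng : ¬ GoodC m c := fun hg => hgood hg.2
    have hnone : lbl.get? c = none := by
      cases hx : lbl.get? c with
      | none => rfl
      | some w => exact absurd ((Hsome c).1 (by rw [hx]; rfl)) hng
    rw [stepA_neg (fun h' => hgood h'.1)]
    refine ⟨hrect, ?_, ?_⟩
    · intro d hInb
      rw [hvis d hInb]
      constructor
      · rintro ⟨e, heP, hge, hr⟩
        exact ⟨e, List.mem_append.2 (Or.inl heP), hge, hr⟩
      · rintro ⟨e, heP', hge, hr⟩
        rcases List.mem_append.1 heP' with h' | h'
        · exact ⟨e, h', hge, hr⟩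
        · rcases List.mem_cons.1 h' with rfl | h''
          · exact absurd hge hng
          · cases h''
    · rw [hout, labOrder_append_none hnone]

lemma invA_fold {m : List (List Int)} {lbl : PySem.Dict Cell Cell}
    (Hsome : ∀ x : Cell, (lbl.get? x).isSome ↔ GoodC m x)
    (Hiff : ∀ a b : Cell, GoodC m a → GoodC m b → (lbl.get? a = lbl.get? b ↔ Rch m a b)) :
    ∀ (S P : List Cell) (st : List (List Bool) × List Int),
      gridCells m = P ++ S → InvA m lbl P st →
      InvA m lbl (gridCells m) (S.foldl (fun st c => stepA m st c.1 c.2) st) := by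
  intro S
  induction S with
  | nil =>
    intro P st hsplit h
    rw [List.append_nil] at hsplit
    simp only [List.foldl_nil]
    rw [hsplit]
    exact h
  | cons c S' ih =>
    intro P st hsplit h
    have hstep := invA_step Hsome Hiff (S := S') hsplit h
    have hsplit' : gridCells m = (P ++ [c]) ++ S' := by
      rw [hsplit, List.append_assoc]; rfl
    exact ih (P ++ [c]) _ hsplit' hstep

-- ---------- InvC: the counting sweep ----------

lemma invC_init {lbl : PySem.Dict Cell Cell} : InvC lbl [] (PySem.Dict.empty, []) := by
  refine ⟨rfl, ?_, ?_⟩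
  · intro lab; simp [PySem.Dict.getD_empty]
  · intro lab; simp [PySem.Dict.contains_empty]

lemma stepC_none {lbl : PySem.Dict Cell Cell} {st : PySem.Dict Cell Int × List Cell} {i j : Int}
    (hc : lbl.get? (i, j) = none) : stepC lbl st i j = st := by
  unfold stepC
  rw [hc]

lemma stepC_some_mem {lbl : PySem.Dict Cell Cell} {st : PySem.Dict Cell Int × List Cell}
    {i j : Int} {lab : Cell} (hc : lbl.get? (i, j) = some lab)
    (hcont : st.1.contains lab = true) :
    stepC lbl st i j = (st.1.insert lab (st.1.getD lab 0 + 1), st.2) := by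
  unfold stepC
  rw [hc]
  show ((if st.1.contains lab = true then st else (st.1.insert lab 0, st.2 ++ [lab])).1.insert lab
      ((if st.1.contains lab = true then st else (st.1.insert lab 0, st.2 ++ [lab])).1.getD lab 0 + 1),
    (if st.1.contains lab = true then st else (st.1.insert lab 0, st.2 ++ [lab])).2) = _
  rw [if_pos hcont]

lemma stepC_some_new {lbl : PySem.Dict Cell Cell} {st : PySem.Dict Cell Int × List Cell}
    {i j : Int} {lab : Cell} (hc : lbl.get? (i, j) = some lab)
    (hcont : ¬ st.1.contains lab = true) :
    stepC lbl st i j = ((st.1.insert lab 0).insert lab ((st.1.insert lab 0).getD lab 0 + 1),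
      st.2 ++ [lab]) := by
  unfold stepC
  rw [hc]
  show ((if st.1.contains lab = true then st else (st.1.insert lab 0, st.2 ++ [lab])).1.insert lab
      ((if st.1.contains lab = true then st else (st.1.insert lab 0, st.2 ++ [lab])).1.getD lab 0 + 1),
    (if st.1.contains lab = true then st else (st.1.insert lab 0, st.2 ++ [lab])).2) = _
  rw [if_neg hcont]

lemma invC_step {lbl : PySem.Dict Cell Cell} {P : List Cell} {c : Cell}
    {st : PySem.Dict Cell Int × List Cell} (h : InvC lbl P st) :
    InvC lbl (P ++ [c]) (stepC lbl st c.1 c.2) := by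
  obtain ⟨h1, h2, h3⟩ := h
  cases hc : lbl.get? c with
  | none =>
    rw [stepC_none hc]
    refine ⟨?_, ?_, ?_⟩
    · rw [h1, labOrder_append_none hc]
    · intro lab
      rw [h2 lab, List.countP_append]
      have hz : ([c].countP (fun d => lbl.get? d == some lab)) = 0 := by
        simp [hc]
      rw [hz]
      rfl
    · intro lab
      rw [h3 lab]
      constructor
      · rintro ⟨d, hd, hld⟩
        exact ⟨d, List.mem_append.2 (Or.inl hd), hld⟩
      · rintro ⟨d, hd, hld⟩
        rcases List.mem_append.1 hd with h' | h'
        · exact ⟨d, h', hld⟩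
        · rcases List.mem_cons.1 h' with rfl | h''
          · rw [hc] at hld; cases hld
          · cases h''
  | some lab0 =>
    have hcnt1 : ∀ lab : Cell, ((P ++ [c]).countP (fun d => lbl.get? d == some lab))
        = P.countP (fun d => lbl.get? d == some lab) + (if lab = lab0 then 1 else 0) := by
      intro lab
      rw [List.countP_append]
      congr 1
      by_cases hll : lab = lab0
      · subst hll
        simp [hc]
      · have hb : (lbl.get? c == some lab) = false := by
          rw [hc]
          simp only [beq_eq_false_iff_ne, ne_eq, Option.some.injEq]
          exact fun h' => hll h'.symm
        simp [hb, hll]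
    by_cases hcont : st.1.contains lab0 = true
    · rw [stepC_some_mem hc hcont]
      refine ⟨?_, ?_, ?_⟩
      · have hmem : lab0 ∈ labOrder lbl P := mem_labOrder.2 ((h3 lab0).1 hcont)
        rw [h1, labOrder_append_some hc, if_pos hmem]
      · intro lab
        rw [PySem.Dict.getD_insert, hcnt1 lab]
        by_cases hll : lab = lab0
        · subst hll
          rw [if_pos rfl, if_pos rfl, h2 lab]
          push_cast
          ring
        · rw [if_neg hll, if_neg hll, h2 lab]
          push_cast
          ring
      · intro lab
        rw [PySem.Dict.contains_insert]
        constructor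
        · intro h'
          rcases Bool.or_eq_true_iff.1 h' with h'' | h''
          · have heq : lab = lab0 := by simpa using h''
            exact ⟨c, List.mem_append.2 (Or.inr List.mem_cons_self), by rw [hc, heq]⟩
          · obtain ⟨d, hd, hld⟩ := (h3 lab).1 h''
            exact ⟨d, List.mem_append.2 (Or.inl hd), hld⟩
        · rintro ⟨d, hd, hld⟩
          rcases List.mem_append.1 hd with h' | h'
          · exact Bool.or_eq_true_iff.2 (Or.inr ((h3 lab).2 ⟨d, h', hld⟩))
          · rcases List.mem_cons.1 h' with rfl | h''
            · have heq : lab = lab0 := by rw [hc] at hld; exact (Option.some.inj hld).symm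
              exact Bool.or_eq_true_iff.2 (Or.inl (by simpa using heq))
            · cases h''
    · rw [stepC_some_new hc hcont]
      have hnoP : ¬ ∃ d ∈ P, lbl.get? d = some lab0 := fun h' => hcont ((h3 lab0).2 h')
      have hcnt0 : P.countP (fun d => lbl.get? d == some lab0) = 0 := by
        refine List.countP_eq_zero.2 ?_
        intro d hd h'
        exact hnoP ⟨d, hd, by simpa using h'⟩
      refine ⟨?_, ?_, ?_⟩
      · have hmem : lab0 ∉ labOrder lbl P := fun h' => hnoP (mem_labOrder.1 h')
        rw [h1, labOrder_append_some hc, if_neg hmem]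
      · intro lab
        rw [PySem.Dict.getD_insert, PySem.Dict.getD_insert_self, hcnt1 lab]
        by_cases hll : lab = lab0
        · subst hll
          rw [if_pos rfl, if_pos rfl, hcnt0]
          simp
        · rw [if_neg hll, if_neg hll, PySem.Dict.getD_insert, if_neg hll, h2 lab]
          simp
      · intro lab
        rw [PySem.Dict.contains_insert, PySem.Dict.contains_insert]
        constructor
        · intro h'
          rcases Bool.or_eq_true_iff.1 h' with h'' | h''
          · have heq : lab = lab0 := by simpa using h''
            exact ⟨c, List.mem_append.2 (Or.inr List.mem_cons_self), by rw [hc, heq]⟩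
          · rcases Bool.or_eq_true_iff.1 h'' with h3' | h3'
            · have heq : lab = lab0 := by simpa using h3'
              exact ⟨c, List.mem_append.2 (Or.inr List.mem_cons_self), by rw [hc, heq]⟩
            · obtain ⟨d, hd, hld⟩ := (h3 lab).1 h3'
              exact ⟨d, List.mem_append.2 (Or.inl hd), hld⟩
        · rintro ⟨d, hd, hld⟩
          rcases List.mem_append.1 hd with h' | h'
          · exact Bool.or_eq_true_iff.2
              (Or.inr (Bool.or_eq_true_iff.2 (Or.inr ((h3 lab).2 ⟨d, h', hld⟩))))
          · rcases List.mem_cons.1 h' with rfl | h''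
            · have heq : lab = lab0 := by rw [hc] at hld; exact (Option.some.inj hld).symm
              exact Bool.or_eq_true_iff.2 (Or.inl (by simpa using heq))
            · cases h''

lemma invC_fold {lbl : PySem.Dict Cell Cell} :
    ∀ (S P : List Cell) (st : PySem.Dict Cell Int × List Cell),
      InvC lbl P st → InvC lbl (P ++ S) (S.foldl (fun st c => stepC lbl st c.1 c.2) st) := by
  intro S
  induction S with
  | nil => intro P st h; simpa using h
  | cons c S' ih =>
    intro P st h
    have hstep := invC_step (c := c) h
    have := ih (P ++ [c]) _ hstep
    simpa [List.append_assoc] using this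

-- ===== VERDICT (by name: the statement is the Claim_ definition above) =====
theorem count_gaps_spec : Claim_equal_count_gaps := by
  intro matrix hdom hpre
  unfold Spec_count_gaps
  by_cases hm : matrix = []
  · subst hm
    rfl
  · have hsplit0 : gridCells matrix = [] ++ gridCells matrix := rfl
    have hInvB := invB_fold (m := matrix) (gridCells matrix) [] PySem.Dict.empty
      PySem.Dict.empty hsplit0 invB_init
    have Hsome : ∀ x : Cell,
        ((((gridCells matrix).foldl (fun st c => stepB matrix st.1 st.2 c.1 c.2)
          (PySem.Dict.empty, PySem.Dict.empty)).1).get? x).isSome ↔ GoodC matrix x := by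
      intro x
      rw [hInvB.some_iff x]
      constructor
      · rintro ⟨hg, _⟩
        exact hg
      · intro hg
        exact ⟨hg, mem_gridCells.2 hg.1⟩
    have Hiff : ∀ a b : Cell, GoodC matrix a → GoodC matrix b →
        ((((gridCells matrix).foldl (fun st c => stepB matrix st.1 st.2 c.1 c.2)
          (PySem.Dict.empty, PySem.Dict.empty)).1).get? a =
         (((gridCells matrix).foldl (fun st c => stepB matrix st.1 st.2 c.1 c.2)
          (PySem.Dict.empty, PySem.Dict.empty)).1).get? b ↔ Rch matrix a b) := by
      intro a b hga hgb
      rw [hInvB.classes a b hga (mem_gridCells.2 hga.1) hgb (mem_gridCells.2 hgb.1)]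
      constructor
      · exact conP_to_rch
      · intro hr
        rcases rch_to_conP hga hr with heq | ⟨_, hcon⟩
        · rw [heq]
          exact Relation.ReflTransGen.refl
        · exact hcon
    have hInvA0 : InvA matrix
        ((gridCells matrix).foldl (fun st c => stepB matrix st.1 st.2 c.1 c.2)
          (PySem.Dict.empty, PySem.Dict.empty)).1 []
        (List.replicate matrix.length (List.replicate (matrix.headD []).length false),
          ([] : List Int)) := by
      refine ⟨⟨List.length_replicate, ?_⟩, ?_, rfl⟩
      · intro row hrow
        rw [List.eq_of_mem_replicate hrow]
        exact List.length_replicate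
      · intro d hInb
        rw [vget_init hInb.1 hInb.2.2.1]
        constructor
        · intro h'
          cases h'
        · rintro ⟨e, he, _⟩
          cases he
    have hInvA := invA_fold Hsome Hiff (gridCells matrix) [] _ hsplit0 hInvA0
    have hInvC := invC_fold
      (lbl := ((gridCells matrix).foldl (fun st c => stepB matrix st.1 st.2 c.1 c.2)
        (PySem.Dict.empty, PySem.Dict.empty)).1)
      (gridCells matrix) [] (PySem.Dict.empty, []) invC_init
    obtain ⟨_, _, houtA⟩ := hInvA
    obtain ⟨hord, hcnt, _⟩ := hInvC
    have eA : count_gaps matrix = ((gridCells matrix).foldl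
        (fun st c => stepA matrix st c.1 c.2)
        (List.replicate matrix.length (List.replicate (matrix.headD []).length false),
          ([] : List Int))).2 := by
      unfold count_gaps
      rw [fold2_eq]
      rfl
    have eB : count_gaps_alt matrix = ((gridCells matrix).foldl
        (fun st c => stepC ((gridCells matrix).foldl (fun st c => stepB matrix st.1 st.2 c.1 c.2)
          (PySem.Dict.empty, PySem.Dict.empty)).1 st c.1 c.2)
        ((PySem.Dict.empty : PySem.Dict Cell Int), ([] : List Cell))).2.map (fun lab =>
          ((gridCells matrix).foldl
            (fun st c => stepC ((gridCells matrix).foldl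
              (fun st c => stepB matrix st.1 st.2 c.1 c.2)
              (PySem.Dict.empty, PySem.Dict.empty)).1 st c.1 c.2)
            ((PySem.Dict.empty : PySem.Dict Cell Int), ([] : List Cell))).1.getD lab 0) := by
      unfold count_gaps_alt bCounts bLabel
      rw [if_neg hm]
      rw [fold2_eq, fold2_eq]
      rfl
    rw [eA, eB, houtA]
    have hord2 : ([] : List Cell) ++ gridCells matrix = gridCells matrix := rfl
    rw [hord2] at hord hcnt
    rw [hord]
    refine (List.map_congr_left ?_).symm
    intro lab _
    rw [hcnt lab]
    rfl
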